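-- pv_equiv track=rewrite | github.com/yashikajaincode/LeetCode-DSA | 749.py | containVirus
-- ===== SOURCE A (Python) =====
-- from typing import List
--
-- def containVirus(isInfected: List[List[int]]) -> int:
--     m, n = len(isInfected), len(isInfected[0])
--     total_walls = 0
--
--     def neighbors(i, j):
--         for x, y in ((i-1,j), (i+1,j), (i,j-1), (i,j+1)):
--             if 0 <= x < m and 0 <= y < n:
--                 yield x, y
--
--     while True:
--         regions = []
--         frontiers = []
--         walls_needed = []
--
--         visited = [[False] * n for _ in range(m)]
--
--         for i in range(m):
--             for j in range(n):
--                 if isInfected[i][j] == 1 and not visited[i][j]: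
--                     region = []
--                     frontier = set()
--                     walls = 0
--                     queue = [(i,j)]
--                     visited[i][j] = True
--                     while queue:
--                         x, y = queue.pop()
--                         region.append((x, y))
--                         for nx, ny in neighbors(x, y):
--                             if isInfected[nx][ny] == 0:
--                                 frontier.add((nx, ny))
--                                 walls += 1
--                             elif isInfected[nx][ny] == 1 and not visited[nx][ny]:
--                                 visited[nx][ny] = True
--                                 queue.append((nx, ny))
--                     regions.append(region)
--                     frontiers.append(frontier)
--                     walls_needed.append(walls)
--
--         if not regions:
--             break
--
--         # Choose the most threatening region
--         idx = frontiers.index(max(frontiers, key=len))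
--         total_walls += walls_needed[idx]
--
--         # Quarantine the most threatening region
--         for i, region in enumerate(regions):
--             if i == idx:
--                 for x, y in region:
--                     isInfected[x][y] = -1  # quarantined
--             else:
--                 for x, y in frontiers[i]:
--                     isInfected[x][y] = 1  # spread
--
--     return total_walls
-- ===== SOURCE B (Python) =====
-- def containVirus(isInfected):
--     m, n = len(isInfected), len(isInfected[0])
--     total = 0
--     grid = isInfected
--     while True:
--         # one row-major pass of two-neighbour component labelling (merge-by-relabel, min label wins)
--         comp = {}
--         nxt = 0
--         for i in range(m):
--             for j in range(n):
--                 if grid[i][j] == 1: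
--                     up = comp.get((i - 1, j))
--                     left = comp.get((i, j - 1))
--                     if up is None and left is None:
--                         comp[(i, j)] = nxt
--                         nxt += 1
--                     elif up is None:
--                         comp[(i, j)] = left
--                     elif left is None or up == left:
--                         comp[(i, j)] = up
--                     else:
--                         keep, drop = min(up, left), max(up, left)
--                         for cell, lab in comp.items():
--                             if lab == drop:
--                                 comp[cell] = keep
--                         comp[(i, j)] = keep
--         labels = sorted(set(comp.values()))
--         if not labels:
--             return total
--         # measure each component, in label order (= row-major order of first cells)
--         groups = []
--         for lab in labels:
--             cells = [cell for cell, l in comp.items() if l == lab]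
--             frontier = set()
--             walls = 0
--             for (x, y) in cells:
--                 for (a, b) in ((x - 1, y), (x + 1, y), (x, y - 1), (x, y + 1)):
--                     if 0 <= a < m and 0 <= b < n and grid[a][b] == 0:
--                         frontier.add((a, b))
--                         walls += 1
--             groups.append((cells, frontier, walls))
--         best = 0
--         for k in range(1, len(groups)):
--             if len(groups[k][1]) > len(groups[best][1]):
--                 best = k
--         total += groups[best][2]
--         quarantine = set(groups[best][0])
--         spread = set()
--         for k in range(len(groups)):
--             if k != best:
--                 spread |= groups[k][1]
--         grid = [[-1 if (i, j) in quarantine else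
--                  1 if (i, j) in spread else grid[i][j]
--                  for j in range(len(grid[i]))] for i in range(m)]
-- ===== Notes on version B (the rewrite author's own statement) =====
-- stated objective: alternative
-- what changed: The per-day stack-based flood fill (queue, visited matrix, interleaved wall/frontier accounting, max()+list.index() selection, in-place writes) is replaced by a queue-free single row-major two-neighbour connected-component labelling pass over a dict (merge-by-relabel, minimum label wins), components then grouped by sorted label and measured in a separate pass, with a single-pass argmax and a functional grid rebuild; B does not mutate the input list (A does).
import Mathlib
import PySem

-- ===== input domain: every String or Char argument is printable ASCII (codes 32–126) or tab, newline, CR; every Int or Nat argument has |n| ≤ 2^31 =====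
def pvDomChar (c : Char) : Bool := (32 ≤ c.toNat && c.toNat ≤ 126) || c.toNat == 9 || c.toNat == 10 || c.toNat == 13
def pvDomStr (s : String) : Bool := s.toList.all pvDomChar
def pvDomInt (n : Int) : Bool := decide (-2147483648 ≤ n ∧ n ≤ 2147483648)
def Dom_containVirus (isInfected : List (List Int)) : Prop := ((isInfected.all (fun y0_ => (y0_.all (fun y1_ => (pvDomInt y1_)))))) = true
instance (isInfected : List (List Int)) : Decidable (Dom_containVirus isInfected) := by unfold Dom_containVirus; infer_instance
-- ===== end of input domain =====

-- B replaces A's per-day stack-DFS flood fill (queue, visited matrix, interleaved wall/frontier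
-- accounting, max+index selection, in-place writes) by a queue-free single row-major two-neighbour
-- component-labelling pass over a dict (merge-by-relabel, minimum label wins), grouping by sorted
-- label, a separate measurement pass, a single-pass argmax and a functional grid rebuild;
-- equivalence is about the RETURN value (Python A mutates its argument, Python B does not).

-- ===== PORT A =====
-- cells are (row, column) pairs, as in the Python tuples
-- A enumerates the 4 neighbours of (x,y) in its `neighbors` generator and keeps the in-bounds
-- ones; the order (up, down, left, right) is the Python order
def pvNbrs (m n x y : Int) : List (Int × Int) :=
  [(x-1,y),(x+1,y),(x,y-1),(x,y+1)].filter
    (fun c => decide (0 ≤ c.1) && decide (c.1 < m) && decide (0 ≤ c.2) && decide (c.2 < n))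

-- isInfected[x][y]; the default 0 is never read: both programs only index in-bounds cells
-- (rows have length ≥ n under Pre_)
def pvVal (g : List (List Int)) (x y : Int) : Int :=
  PySem.List.pyGetD (PySem.List.pyGetD g x []) y 0

-- visited[c1][c2] on A's boolean matrix
def pvVisGet (vis : List (List Bool)) (c : Int × Int) : Bool :=
  PySem.List.pyGetD (PySem.List.pyGetD vis c.1 []) c.2 false
-- visited[c1][c2] = True
def pvVisSet (vis : List (List Bool)) (c : Int × Int) : List (List Bool) :=
  PySem.List.pySetD vis c.1 (PySem.List.pySetD (PySem.List.pyGetD vis c.1 []) c.2 true)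

-- isInfected[c1][c2] = v
def pvGridSet (g : List (List Int)) (c : Int × Int) (v : Int) : List (List Int) :=
  PySem.List.pySetD g c.1 (PySem.List.pySetD (PySem.List.pyGetD g c.1 []) c.2 v)

-- the body of A's `for nx, ny in neighbors(x, y):` loop, acting on (visited, queue, frontier, walls)
def pvFloodAStep (g : List (List Int))
    (s : List (List Bool) × List (Int × Int) × PySem.Set (Int × Int) × Int) (q : Int × Int) :
    List (List Bool) × List (Int × Int) × PySem.Set (Int × Int) × Int :=
  if pvVal g q.1 q.2 == 0 then
    (s.1, s.2.1, PySem.Set.add s.2.2.1 q, s.2.2.2 + 1)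
  else if pvVal g q.1 q.2 == 1 && !(pvVisGet s.1 q) then
    (pvVisSet s.1 q, s.2.1 ++ [q], s.2.2.1, s.2.2.2)
  else s

-- A's inner `while queue:` loop; fuel only makes the recursion structural (each iteration pops one
-- element, and at most 1 + m*n elements are ever pushed, so the fuel passed below never runs out)
def pvFloodA (g : List (List Int)) (m n : Int) :
    Nat → List (List Bool) → List (Int × Int) → List (Int × Int) →
    PySem.Set (Int × Int) → Int →
    List (List Bool) × List (Int × Int) × PySem.Set (Int × Int) × Int
  | 0, vis, _, region, frontier, walls => (vis, region, frontier, walls)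
  | fuel+1, vis, queue, region, frontier, walls =>
    match queue.getLast? with
    | none => (vis, region, frontier, walls)          -- queue empty: leave the loop
    | some c =>                                       -- x, y = queue.pop()
      let st := (pvNbrs m n c.1 c.2).foldl (pvFloodAStep g) (vis, queue.dropLast, frontier, walls)
      pvFloodA g m n fuel st.1 st.2.1 (region ++ [c]) st.2.2.1 st.2.2.2

-- the per-day scan `for i in range(m): for j in range(n): …` collecting regions/frontiers/walls
def pvScanA (g : List (List Int)) (m n : Int) :
    List (List (Int × Int)) × List (PySem.Set (Int × Int)) × List Int :=
  let init := (List.replicate m.toNat (List.replicate n.toNat false),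
               ([] : List (List (Int × Int))), ([] : List (PySem.Set (Int × Int))), ([] : List Int))
  let r := (PySem.List.pyRange 0 m 1).foldl (fun s i =>
      (PySem.List.pyRange 0 n 1).foldl (fun s j =>
        if pvVal g i j == 1 && !(pvVisGet s.1 (i, j)) then
          let vis := pvVisSet s.1 (i, j)
          let f := pvFloodA g m n ((m*n).toNat + 2) vis [(i, j)] [] PySem.Set.empty 0
          (f.1, s.2.1 ++ [f.2.1], s.2.2.1 ++ [f.2.2.1], s.2.2.2 ++ [f.2.2.2])
        else s) s) init
  (r.2.1, r.2.2.1, r.2.2.2)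

-- frontiers.index(mx): Python list.index compares with ==, which on sets is set equality
def pvIdxOf : List (PySem.Set (Int × Int)) → PySem.Set (Int × Int) → Int
  | [], _ => 0
  | f :: rest, t => if PySem.Set.equal f t then 0 else 1 + pvIdxOf rest t

-- the quarantine/spread writes of one day (`for i, region in enumerate(regions): …`)
def pvUpdateA (g : List (List Int)) (regions : List (List (Int × Int)))
    (frontiers : List (PySem.Set (Int × Int))) (idx : Int) : List (List Int) :=
  (PySem.List.enumerate regions 0).foldl (fun g ir =>
    if ir.1 == idx then ir.2.foldl (fun g c => pvGridSet g c (-1)) g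
    else (PySem.List.pyGetD frontiers ir.1 PySem.Set.empty).foldl
           (fun g c => pvGridSet g c 1) g) g

-- one iteration of A's `while True:` body; none = `break`
def pvDayA (g : List (List Int)) (m n : Int) : Option (List (List Int) × Int) :=
  let r := pvScanA g m n
  if r.1.isEmpty then none
  else
    match PySem.List.max? r.2.1 (fun s => PySem.Set.len s) with
    | none => none                                    -- unreachable: regions nonempty
    | some mx =>
      let idx := pvIdxOf r.2.1 mx
      some (pvUpdateA g r.1 r.2.1 idx, PySem.List.pyGetD r.2.2 idx 0)

-- `while True:`; each non-break iteration turns at least one 1-cell into -1, so at most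
-- m*n iterations precede the break and the fuel below never runs out
def pvLoopA (m n : Int) : Nat → List (List Int) → Int → Int
  | 0, _, total => total
  | fuel+1, g, total =>
    match pvDayA g m n with
    | none => total
    | some r => pvLoopA m n fuel r.1 (total + r.2)

def containVirus (isInfected : List (List Int)) : Int :=
  let m : Int := isInfected.length
  let n : Int := (PySem.List.pyGetD isInfected 0 []).length
  pvLoopA m n ((m*n).toNat + 1) isInfected 0

-- ===== PORT B =====
-- the per-cell body of B's labelling pass on the state (comp, nxt); the merge branch's
-- `for cell, lab in comp.items(): if lab == drop: comp[cell] = keep` iterates the live dict, but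
-- each write only changes the value at the key just visited, so a fold over the items snapshot
-- is exact
def pvStepLab (g : List (List Int))
    (s : PySem.Dict (Int × Int) Int × Int) (c : Int × Int) :
    PySem.Dict (Int × Int) Int × Int :=
  if pvVal g c.1 c.2 == 1 then
    match s.1.get? (c.1 - 1, c.2), s.1.get? (c.1, c.2 - 1) with
    | none, none => (s.1.insert c s.2, s.2 + 1)
    | none, some l => (s.1.insert c l, s.2)
    | some u, none => (s.1.insert c u, s.2)
    | some u, some l =>
      if u == l then (s.1.insert c u, s.2)
      else
        let keep := min u l
        let drop := max u l
        let d := s.1.items.foldl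
          (fun d cl => if cl.2 == drop then d.insert cl.1 keep else d) s.1
        (d.insert c keep, s.2)
  else s

-- B's row-major labelling scan (`for i in range(m): for j in range(n): …`)
def pvScanLab (g : List (List Int)) (m n : Int) : PySem.Dict (Int × Int) Int :=
  ((PySem.List.pyRange 0 m 1).foldl (fun s i =>
      (PySem.List.pyRange 0 n 1).foldl (fun s j => pvStepLab g s (i, j)) s)
    (PySem.Dict.empty, 0)).1

-- B's measurement pass over one component's cells
def pvMeasureB (g : List (List Int)) (m n : Int) (cells : List (Int × Int)) :
    PySem.Set (Int × Int) × Int :=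
  cells.foldl (fun fw c =>
    (pvNbrs m n c.1 c.2).foldl (fun fw q =>
      if pvVal g q.1 q.2 == 0 then (PySem.Set.add fw.1 q, fw.2 + 1) else fw)
      fw) (PySem.Set.empty, 0)

-- B's `for lab in labels:` grouping loop
def pvGroupsB (g : List (List Int)) (m n : Int) (comp : PySem.Dict (Int × Int) Int)
    (labels : List Int) : List (List (Int × Int) × PySem.Set (Int × Int) × Int) :=
  labels.foldl (fun gs lab =>
    let cells := (comp.items.filter (fun cl => cl.2 == lab)).map (fun cl => cl.1)
    let fw := pvMeasureB g m n cells
    gs ++ [(cells, fw.1, fw.2)]) []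

def pvGroupD : List (Int × Int) × PySem.Set (Int × Int) × Int :=
  ([], PySem.Set.empty, 0)

-- one iteration of B's `while True:` body; none = `return total`
def pvDayB (g : List (List Int)) (m n : Int) : Option (List (List Int) × Int) :=
  let comp := pvScanLab g m n
  let labels := PySem.List.sorted (PySem.Set.ofList comp.values) (fun x => x) false
  if labels.isEmpty then none
  else
    let groups := pvGroupsB g m n comp labels
    let best := (PySem.List.pyRange 1 groups.length 1).foldl (fun best k =>
      if PySem.Set.len (PySem.List.pyGetD groups k pvGroupD).2.1 >
         PySem.Set.len (PySem.List.pyGetD groups best pvGroupD).2.1 then k else best) 0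
    let quarantine := PySem.Set.ofList (PySem.List.pyGetD groups best pvGroupD).1
    let spread := (PySem.List.pyRange 0 groups.length 1).foldl (fun sp k =>
      if k ≠ best then PySem.Set.update sp (PySem.List.pyGetD groups k pvGroupD).2.1 else sp)
      (PySem.Set.empty : PySem.Set (Int × Int))
    let g' := (PySem.List.pyRange 0 m 1).map (fun i =>
      (PySem.List.pyRange 0 ((PySem.List.pyGetD g i []).length : Int) 1).map (fun j =>
        if PySem.Set.contains quarantine (i, j) then -1
        else if PySem.Set.contains spread (i, j) then 1
        else pvVal g i j))
    some (g', (PySem.List.pyGetD groups best pvGroupD).2.2)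

def pvLoopB (m n : Int) : Nat → List (List Int) → Int → Int
  | 0, _, total => total
  | fuel+1, g, total =>
    match pvDayB g m n with
    | none => total
    | some r => pvLoopB m n fuel r.1 (total + r.2)

def containVirus_alt (isInfected : List (List Int)) : Int :=
  let m : Int := isInfected.length
  let n : Int := (PySem.List.pyGetD isInfected 0 []).length
  pvLoopB m n ((m*n).toNat + 1) isInfected 0

-- ===== PRECONDITION & SPEC =====
-- Pre_ excludes exactly the inputs where the Python raises IndexError: the empty grid
-- (isInfected[0]) and grids with a row shorter than the first row (isInfected[i][j], j < n)
def Pre_containVirus (isInfected : List (List Int)) : Prop :=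
  isInfected ≠ [] ∧
  ∀ row ∈ isInfected, (isInfected.headD []).length ≤ row.length
instance (isInfected : List (List Int)) : Decidable (Pre_containVirus isInfected) := by
  unfold Pre_containVirus; infer_instance

def pvWitness_containVirus : List (List Int) := [[1, 0, 1], [0, 1, 0]]

def Spec_containVirus (isInfected : List (List Int)) (out : Int) : Prop := out = containVirus_alt isInfected
instance (isInfected : List (List Int)) (out : Int) : Decidable (Spec_containVirus isInfected out) := by unfold Spec_containVirus; infer_instance

-- ===== CLAIM (what is proved, stated in full; the proofs are below) =====
def Claim_equal_containVirus : Prop := ∀ (isInfected : List (List Int)), Dom_containVirus isInfected → Pre_containVirus isInfected → Spec_containVirus isInfected (containVirus isInfected)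

-- ===== LEMMAS AND PROOFS =====

-- cells, adjacency, reachability --------------------------------------------------------------

def PVInR (m n : Int) (c : Int × Int) : Prop := 0 ≤ c.1 ∧ c.1 < m ∧ 0 ≤ c.2 ∧ c.2 < n

def PVOne (g : List (List Int)) (m n : Int) (c : Int × Int) : Prop :=
  PVInR m n c ∧ pvVal g c.1 c.2 = 1

def PVStep (g : List (List Int)) (m n : Int) (p q : Int × Int) : Prop :=
  PVOne g m n p ∧ PVOne g m n q ∧ q ∈ pvNbrs m n p.1 p.2

def PVReach (g : List (List Int)) (m n : Int) : Int × Int → Int × Int → Prop :=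
  Relation.ReflTransGen (PVStep g m n)

def PVZNbr (g : List (List Int)) (m n : Int) (p q : Int × Int) : Prop :=
  q ∈ pvNbrs m n p.1 p.2 ∧ pvVal g q.1 q.2 = 0

def pvZC (g : List (List Int)) (m n : Int) (p : Int × Int) : Int :=
  (((pvNbrs m n p.1 p.2).filter (fun q => pvVal g q.1 q.2 == 0)).length : Int)

theorem mem_pvNbrs {m n x y : Int} {q : Int × Int} :
    q ∈ pvNbrs m n x y ↔
      (q = (x-1,y) ∨ q = (x+1,y) ∨ q = (x,y-1) ∨ q = (x,y+1)) ∧ PVInR m n q := by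
  simp only [pvNbrs, List.mem_filter, List.mem_cons, List.not_mem_nil, or_false,
    Bool.and_eq_true, decide_eq_true_eq, PVInR]
  tauto

theorem nodup_pvNbrs (m n x y : Int) : (pvNbrs m n x y).Nodup := by
  apply List.Nodup.filter
  refine List.nodup_cons.mpr ⟨?_, List.nodup_cons.mpr ⟨?_, List.nodup_cons.mpr ⟨?_, List.nodup_singleton _⟩⟩⟩ <;>
    simp only [List.mem_cons, List.not_mem_nil, or_false, Prod.mk.injEq] <;> omega

theorem mem_pvNbrs_symm {m n : Int} {p q : Int × Int} (hp : PVInR m n p)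
    (h : q ∈ pvNbrs m n p.1 p.2) : p ∈ pvNbrs m n q.1 q.2 := by
  rcases mem_pvNbrs.mp h with ⟨ho, hq⟩
  refine mem_pvNbrs.mpr ⟨?_, hp⟩
  obtain ⟨p1, p2⟩ := p
  rcases ho with h|h|h|h <;> subst h <;> simp

theorem PVStep.symm' {g : List (List Int)} {m n : Int} {p q : Int × Int}
    (h : PVStep g m n p q) : PVStep g m n q p :=
  ⟨h.2.1, h.1, mem_pvNbrs_symm h.1.1 h.2.2⟩

-- if V is closed under steps and misses c, it misses everything reachable from c
theorem pv_reach_avoids {g : List (List Int)} {m n : Int} {V : Int × Int → Prop}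
    (hcl : ∀ p q, V p → PVStep g m n p q → V q) {c d : Int × Int}
    (hc : ¬ V c) (h : PVReach g m n c d) : ¬ V d := by
  induction h with
  | refl => exact hc
  | tail _ hs ih => exact fun hv => ih (hcl _ _ hv hs.symm')

theorem pv_reach_symm {g : List (List Int)} {m n : Int} {p q : Int × Int}
    (h : PVReach g m n p q) : PVReach g m n q p := by
  induction h with
  | refl => exact Relation.ReflTransGen.refl
  | tail _ hs ih => exact Relation.ReflTransGen.head hs.symm' ih

-- reachability stays inside infected cells
theorem pv_reach_one {g : List (List Int)} {m n : Int} {c p : Int × Int}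
    (hc : PVOne g m n c) (h : PVReach g m n c p) : PVOne g m n p := by
  induction h with
  | refl => exact hc
  | tail _ hs _ => exact hs.2.1


-- A's visited matrix ---------------------------------------------------------------------------

def PVDims (vis : List (List Bool)) (m n : Int) : Prop :=
  (vis.length : Int) = m ∧ ∀ row ∈ vis, (row.length : Int) = n

theorem pvVisGet_of_all_false {vis : List (List Bool)} (h : ∀ row ∈ vis, ∀ b ∈ row, b = false)
    (c : Int × Int) : pvVisGet vis c = false := by
  unfold pvVisGet PySem.List.pyGetD
  cases ho : PySem.List.pyGet? vis c.1 with
  | none => simp [PySem.List.pyGet?, PySem.List.pyIdx?]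
  | some row =>
    have hrow := PySem.List.mem_of_pyGet?_eq_some vis ho
    simp only [Option.getD_some]
    cases hi : PySem.List.pyGet? row c.2 with
    | none => simp
    | some b => exact h row hrow b (PySem.List.mem_of_pyGet?_eq_some row hi)

theorem pvVisGet_replicate (a b : Nat) (c : Int × Int) :
    pvVisGet (List.replicate a (List.replicate b false)) c = false := by
  refine pvVisGet_of_all_false (fun row hrow bit hbit => ?_) c
  rw [List.eq_of_mem_replicate hrow] at hbit
  exact List.eq_of_mem_replicate hbit

theorem PVDims_replicate {m n : Int} (hm : 0 ≤ m) (hn : 0 ≤ n) :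
    PVDims (List.replicate m.toNat (List.replicate n.toNat false)) m n := by
  constructor
  · simp [Int.toNat_of_nonneg hm]
  · intro row hrow
    rw [List.eq_of_mem_replicate hrow]
    simp [Int.toNat_of_nonneg hn]

theorem PVDims_visSet {vis : List (List Bool)} {m n : Int} (hd : PVDims vis m n)
    {c : Int × Int} (hc : PVInR m n c) : PVDims (pvVisSet vis c) m n := by
  obtain ⟨h1, h2⟩ := hd
  obtain ⟨hca, hcb, hcc, hcd⟩ := hc
  unfold pvVisSet
  rw [PySem.List.pySetD_of_nonneg _ _ hca]
  constructor
  · simpa using h1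
  · intro row hrow
    rcases List.mem_or_eq_of_mem_set hrow with h | h
    · exact h2 row h
    · subst h
      rw [PySem.List.pySetD_of_nonneg _ _ hcc]
      have hlt : c.1.toNat < vis.length := by omega
      rw [PySem.List.pyGetD_of_nonneg _ _ hca, List.getD_eq_getElem?_getD,
        List.getElem?_eq_getElem hlt]
      simpa using h2 _ (List.getElem_mem hlt)

theorem pvVisGet_visSet {vis : List (List Bool)} {m n : Int} (hd : PVDims vis m n)
    {c d : Int × Int} (hc : PVInR m n c) (hdin : PVInR m n d) :
    pvVisGet (pvVisSet vis c) d = if d = c then true else pvVisGet vis d := by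
  obtain ⟨h1, h2⟩ := hd
  obtain ⟨hca, hcb, hcc, hcd⟩ := hc
  obtain ⟨hda, hdb, hdc, hdd⟩ := hdin
  have hc1 : c.1.toNat < vis.length := by omega
  have hd1 : d.1.toNat < vis.length := by omega
  have hrowlen : ((vis[c.1.toNat]).length : Int) = n := h2 _ (List.getElem_mem hc1)
  unfold pvVisSet pvVisGet PySem.List.pyGetD
  rw [PySem.List.pyGet?_of_nonneg _ hca, List.getElem?_eq_getElem hc1, Option.getD_some,
    PySem.List.pySetD_of_nonneg _ _ hcc, PySem.List.pySetD_of_nonneg _ _ hca,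
    PySem.List.pyGet?_of_nonneg _ hda, PySem.List.pyGet?_of_nonneg _ hda]
  by_cases hfst : d.1 = c.1
  · rw [hfst, List.getElem?_set_self hc1, Option.getD_some,
      PySem.List.pyGet?_of_nonneg _ hdc, PySem.List.pyGet?_of_nonneg _ hdc,
      List.getElem?_set]
    by_cases hsnd : d.2 = c.2
    · have hdeq : d = c := Prod.ext hfst hsnd
      have ht : c.2.toNat = d.2.toNat := by omega
      have hlt : d.2.toNat < (vis[c.1.toNat]).length := by omega
      simp [ht, hlt, hdeq]
    · have ht : ¬ (c.2.toNat = d.2.toNat) := by omega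
      have hdeq : d ≠ c := fun h => hsnd (congrArg Prod.snd h)
      simp [ht, hdeq, List.getElem?_eq_getElem hc1]
  · have ht : d.1.toNat ≠ c.1.toNat := by omega
    have hdeq : d ≠ c := fun h => hfst (congrArg Prod.fst h)
    rw [List.getElem?_set_ne (fun h => ht h.symm)]
    simp [hdeq]


-- counting unvisited infected cells (the fuel potential) ---------------------------------------

def pvCells (m n : Int) : List (Int × Int) :=
  (PySem.List.pyRange 0 m 1).flatMap (fun i => (PySem.List.pyRange 0 n 1).map (fun j => (i, j)))

theorem mem_pvCells {m n : Int} {c : Int × Int} : c ∈ pvCells m n ↔ PVInR m n c := by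
  simp [pvCells, PySem.List.mem_pyRange_one, PVInR]
  constructor
  · rintro ⟨i, ⟨h1, h2⟩, j, ⟨h3, h4⟩, h⟩
    subst h; exact ⟨by simpa using h1, by simpa using h2, by simpa using h3, by simpa using h4⟩
  · rintro ⟨h1, h2, h3, h4⟩
    exact ⟨c.1, ⟨by simpa using h1, by simpa using h2⟩, c.2, ⟨by simpa using h3, by simpa using h4⟩, rfl⟩

theorem nodup_pvCells (m n : Int) : (pvCells m n).Nodup := by
  unfold pvCells
  rw [List.nodup_flatMap]
  constructor
  · intro i _
    exact (PySem.List.nodup_pyRange_one 0 n).map (fun a b h => by simpa using h)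
  · refine (PySem.List.nodup_pyRange_one 0 m).imp_of_mem ?_
    intro i j _ _ hij
    intro c hci hcj
    simp only [List.mem_map] at hci hcj
    obtain ⟨a, _, ha⟩ := hci; obtain ⟨b, _, hb⟩ := hcj
    rw [← ha] at hb
    exact hij (by simpa using (congrArg Prod.fst hb).symm)

theorem length_pvCells (m n : Int) : (pvCells m n).length = m.toNat * n.toNat := by
  simp [pvCells, List.length_flatMap, PySem.List.length_pyRange_one]

def pvUnvis (g : List (List Int)) (m n : Int) (vis : List (List Bool)) : Nat :=
  ((pvCells m n).filter (fun c => pvVal g c.1 c.2 == 1 && !pvVisGet vis c)).length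

-- a generic exact-decrement lemma for filters over nodup lists
theorem pv_filter_dec {α : Type} {l : List α} (hl : l.Nodup) {c : α} (hc : c ∈ l)
    {p p' : α → Bool} (hpc : p c = true) (hp'c : p' c = false)
    (hag : ∀ d ∈ l, d ≠ c → p' d = p d) :
    (l.filter p').length + 1 = (l.filter p).length := by
  induction l with
  | nil => cases hc
  | cons x t ih =>
    rcases List.mem_cons.mp hc with h | h
    · have hx : x = c := h.symm ▸ rfl
      subst hx
      have hnx : x ∉ t := (List.nodup_cons.mp hl).1
      have heq : t.filter p' = t.filter p :=
        List.filter_congr (fun d hd => hag d (List.mem_cons_of_mem _ hd)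
          (fun he => hnx (he ▸ hd)))
      simp [hpc, hp'c, heq]
    · have hxc : x ≠ c := fun he => (List.nodup_cons.mp hl).1 (he ▸ h)
      have hx : p' x = p x := hag x List.mem_cons_self hxc
      have hrec := ih (List.nodup_cons.mp hl).2 h (fun d hd => hag d (List.mem_cons_of_mem _ hd))
      simp only [List.filter_cons, hx]
      cases hpx : p x <;> simp [← hrec]

theorem pvUnvis_visSet {g : List (List Int)} {m n : Int} {vis : List (List Bool)}
    (hd : PVDims vis m n) {c : Int × Int} (h1 : PVOne g m n c)
    (hnv : pvVisGet vis c = false) :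
    pvUnvis g m n (pvVisSet vis c) + 1 = pvUnvis g m n vis := by
  refine pv_filter_dec (nodup_pvCells m n) (mem_pvCells.mpr h1.1) ?_ ?_ ?_
  · simp [h1.2, hnv]
  · simp [pvVisGet_visSet hd h1.1 h1.1]
  · intro d hd' hne
    rw [pvVisGet_visSet hd h1.1 (mem_pvCells.mp hd')]
    simp [hne]

-- characterization of A's neighbour loop -------------------------------------------------------

theorem pvFoldNbrA (g : List (List Int)) (m n : Int) :
    ∀ (ns : List (Int × Int)) (vis : List (List Bool)) (rest : List (Int × Int))
      (fr : PySem.Set (Int × Int)) (w : Int),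
      ns.Nodup → (∀ q ∈ ns, PVInR m n q) → PVDims vis m n → fr.Nodup →
      (let st := ns.foldl (pvFloodAStep g) (vis, rest, fr, w)
       let marked := ns.filter (fun q => pvVal g q.1 q.2 == 1 && !pvVisGet vis q)
       PVDims st.1 m n ∧
       (∀ p, PVInR m n p → (pvVisGet st.1 p = true ↔ pvVisGet vis p = true ∨ p ∈ marked)) ∧
       st.2.1 = rest ++ marked ∧
       (∀ t, t ∈ st.2.2.1 ↔ t ∈ fr ∨ (t ∈ ns ∧ pvVal g t.1 t.2 = 0)) ∧
       st.2.2.1.Nodup ∧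
       st.2.2.2 = w + ((ns.filter (fun q => pvVal g q.1 q.2 == 0)).length : Int) ∧
       pvUnvis g m n st.1 + marked.length = pvUnvis g m n vis) := by
  intro ns
  induction ns with
  | nil =>
    intro vis rest fr w _ _ hdims hfr
    exact ⟨hdims, fun p _ => by simp, by simp, fun t => by simp, hfr, by simp, by simp⟩
  | cons q tl ih =>
    intro vis rest fr w hnod hin hdims hfr
    have hqin : PVInR m n q := hin q List.mem_cons_self
    have hqtl : q ∉ tl := (List.nodup_cons.mp hnod).1
    have htlnod : tl.Nodup := (List.nodup_cons.mp hnod).2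
    have htlin : ∀ x ∈ tl, PVInR m n x := fun x hx => hin x (List.mem_cons_of_mem _ hx)
    simp only [List.foldl_cons]
    by_cases h0 : pvVal g q.1 q.2 = 0
    · -- frontier/walls branch
      have hstep : pvFloodAStep g (vis, rest, fr, w) q =
          (vis, rest, PySem.Set.add fr q, w + 1) := by
        simp [pvFloodAStep, h0]
      rw [hstep]
      obtain ⟨c1, c2, c3, c4, c5, c6, c7⟩ :=
        ih vis rest (PySem.Set.add fr q) (w+1) htlnod htlin hdims (PySem.Set.nodup_add fr q hfr)
      have hmq : (pvVal g q.1 q.2 == 1 && !pvVisGet vis q) = false := by simp [h0]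
      refine ⟨c1, ?_, ?_, ?_, c5, ?_, ?_⟩
      · intro p hp; rw [c2 p hp]; simp [List.filter_cons, hmq]
      · rw [c3]; simp [List.filter_cons, hmq]
      · intro t
        rw [c4 t]
        simp only [PySem.Set.mem_add, List.mem_cons]
        constructor
        · rintro ((h|h)|⟨h,h'⟩)
          · exact Or.inl h
          · exact Or.inr ⟨Or.inl h, h ▸ h0⟩
          · exact Or.inr ⟨Or.inr h, h'⟩
        · rintro (h|⟨(h|h),h'⟩)
          · exact Or.inl (Or.inl h)
          · exact Or.inl (Or.inr h)
          · exact Or.inr ⟨h, h'⟩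
      · rw [c6]; simp [List.filter_cons, h0]; push_cast; ring
      · rw [← c7]; simp [List.filter_cons, hmq]
    · by_cases h1 : pvVal g q.1 q.2 = 1 ∧ pvVisGet vis q = false
      · -- marking branch
        have hstep : pvFloodAStep g (vis, rest, fr, w) q =
            (pvVisSet vis q, rest ++ [q], fr, w) := by
          simp [pvFloodAStep, h0, h1.1, h1.2]
        rw [hstep]
        have hdims' : PVDims (pvVisSet vis q) m n := PVDims_visSet hdims hqin
        obtain ⟨c1, c2, c3, c4, c5, c6, c7⟩ :=
          ih (pvVisSet vis q) (rest ++ [q]) fr w htlnod htlin hdims' hfr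
        have hmq : (pvVal g q.1 q.2 == 1 && !pvVisGet vis q) = true := by simp [h1.1, h1.2]
        have hfilt : (tl.filter (fun x => pvVal g x.1 x.2 == 1 && !pvVisGet (pvVisSet vis q) x)) =
            (tl.filter (fun x => pvVal g x.1 x.2 == 1 && !pvVisGet vis x)) := by
          refine List.filter_congr (fun d hd => ?_)
          have hdin : PVInR m n d := htlin d hd
          have hne : d ≠ q := fun he => hqtl (he ▸ hd)
          rw [pvVisGet_visSet hdims hqin hdin]
          simp [hne]
        refine ⟨c1, ?_, ?_, ?_, c5, ?_, ?_⟩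
        · intro p hp
          rw [c2 p hp, hfilt, pvVisGet_visSet hdims hqin hp]
          by_cases hpq : p = q <;> simp [hpq, List.filter_cons, hmq] <;> tauto
        · rw [c3, hfilt]; simp [List.filter_cons, hmq]
        · intro t
          rw [c4 t]
          simp only [List.mem_cons]
          constructor
          · rintro (h|⟨h,h'⟩)
            · exact Or.inl h
            · exact Or.inr ⟨Or.inr h, h'⟩
          · rintro (h|⟨(h|h),h'⟩)
            · exact Or.inl h
            · exact absurd (h ▸ h') (h ▸ h0)
            · exact Or.inr ⟨h, h'⟩
        · rw [c6]; simp [List.filter_cons, h0]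
        · rw [hfilt] at c7
          have hdec := pvUnvis_visSet hdims ⟨hqin, h1.1⟩ h1.2
          simp [List.filter_cons, hmq]
          omega
      · -- skip branch
        have hstep : pvFloodAStep g (vis, rest, fr, w) q = (vis, rest, fr, w) := by
          rcases Decidable.not_and_iff_not_or_not.mp h1 with h | h
          · simp [pvFloodAStep, h0, h]
          · have : pvVisGet vis q = true := by
              cases hv : pvVisGet vis q
              · exact absurd hv h
              · rfl
            simp [pvFloodAStep, h0, this]
        rw [hstep]
        obtain ⟨c1, c2, c3, c4, c5, c6, c7⟩ := ih vis rest fr w htlnod htlin hdims hfr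
        have hmq : (pvVal g q.1 q.2 == 1 && !pvVisGet vis q) = false := by
          rcases Decidable.not_and_iff_not_or_not.mp h1 with h | h
          · simp [h]
          · have : pvVisGet vis q = true := by
              cases hv : pvVisGet vis q
              · exact absurd hv h
              · rfl
            simp [this]
        refine ⟨c1, ?_, ?_, ?_, c5, ?_, ?_⟩
        · intro p hp; rw [c2 p hp]; simp [List.filter_cons, hmq]
        · rw [c3]; simp [List.filter_cons, hmq]
        · intro t
          rw [c4 t]
          simp only [List.mem_cons]
          constructor
          · rintro (h|⟨h,h'⟩)
            · exact Or.inl h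
            · exact Or.inr ⟨Or.inr h, h'⟩
          · rintro (h|⟨(h|h),h'⟩)
            · exact Or.inl h
            · exact absurd (h ▸ h') (h ▸ h0)
            · exact Or.inr ⟨h, h'⟩
        · rw [c6]; simp [List.filter_cons, h0]
        · rw [← c7]; simp [List.filter_cons, hmq]


-- full characterization of A's flood fill ------------------------------------------------------

theorem pvFloodA_spec (g : List (List Int)) (m n : Int) :
    ∀ (fuel : Nat) (vis : List (List Bool)) (queue region : List (Int × Int))
      (fr : PySem.Set (Int × Int)) (w : Int),
      pvUnvis g m n vis + queue.length ≤ fuel →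
      PVDims vis m n →
      queue.Nodup →
      (∀ c ∈ queue, PVOne g m n c ∧ pvVisGet vis c = true) →
      fr.Nodup →
      (let R := pvFloodA g m n fuel vis queue region fr w
       ∃ Δ : List (Int × Int),
        R.2.1 = region ++ Δ ∧
        PVDims R.1 m n ∧
        (∀ p, PVInR m n p → (pvVisGet R.1 p = true ↔ pvVisGet vis p = true ∨ p ∈ Δ)) ∧
        Δ.Nodup ∧
        (∀ p ∈ queue, p ∈ Δ) ∧
        (∀ p ∈ Δ, PVOne g m n p) ∧
        (∀ p ∈ Δ, p ∈ queue ∨ pvVisGet vis p = false) ∧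
        (∀ p ∈ Δ, ∃ s ∈ queue, PVReach g m n s p) ∧
        (∀ p ∈ Δ, ∀ q, PVStep g m n p q → pvVisGet R.1 q = true) ∧
        R.2.2.2 = w + (Δ.map (pvZC g m n)).sum ∧
        (∀ t, t ∈ R.2.2.1 ↔ t ∈ fr ∨ ∃ p ∈ Δ, PVZNbr g m n p t) ∧
        R.2.2.1.Nodup) := by
  intro fuel
  induction fuel with
  | zero =>
    intro vis queue region fr w hfuel hdims _ _ hfr
    have hq : queue = [] := List.length_eq_zero_iff.mp (by omega)
    subst hq
    exact ⟨[], by simp [pvFloodA], hdims, fun p _ => by simp [pvFloodA], List.nodup_nil,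
      by simp, by simp, by simp, by simp, by simp [pvFloodA],
      by simp [pvFloodA], fun t => by simp [pvFloodA], by simpa [pvFloodA] using hfr⟩
  | succ fuel ih =>
    intro vis queue region fr w hfuel hdims hqnod hqmem hfr
    cases hq : queue.getLast? with
    | none =>
      have hqe : queue = [] := List.getLast?_eq_none_iff.mp hq
      subst hqe
      exact ⟨[], by simp [pvFloodA, hq], hdims, fun p _ => by simp [pvFloodA, hq], List.nodup_nil,
        by simp, by simp, by simp, by simp, by simp [pvFloodA, hq],
        by simp [pvFloodA, hq], fun t => by simp [pvFloodA, hq], by simpa [pvFloodA, hq] using hfr⟩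
    | some c =>
      have hqd : queue = queue.dropLast ++ [c] := (List.dropLast_append_getLast? c hq).symm
      have hcq : c ∈ queue := by rw [hqd]; simp
      have hcone : PVOne g m n c := (hqmem c hcq).1
      have hcvis : pvVisGet vis c = true := (hqmem c hcq).2
      have hrestnod : queue.dropLast.Nodup := by
        rw [hqd] at hqnod; exact (List.nodup_append.mp hqnod).1
      have hcnrest : c ∉ queue.dropLast := by
        have h2 := hqnod
        rw [hqd, List.nodup_append] at h2
        intro hmem
        exact h2.2.2 c hmem c (List.mem_singleton_self c) rfl
      obtain ⟨c1, c2, c3, c4, c5, c6, c7⟩ :=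
        pvFoldNbrA g m n (pvNbrs m n c.1 c.2) vis queue.dropLast fr w
          (nodup_pvNbrs m n c.1 c.2) (fun q hqn => (mem_pvNbrs.mp hqn).2) hdims hfr
      set ns := pvNbrs m n c.1 c.2 with hns
      set st := ns.foldl (pvFloodAStep g) (vis, queue.dropLast, fr, w) with hst
      set marked := ns.filter (fun q => pvVal g q.1 q.2 == 1 && !pvVisGet vis q) with hmarked
      have hmarked_mem : ∀ p ∈ marked, p ∈ ns ∧ pvVal g p.1 p.2 = 1 ∧ pvVisGet vis p = false := by
        intro p hp
        rw [hmarked] at hp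
        have h1 := List.mem_of_mem_filter hp
        have h2 := List.of_mem_filter hp
        simp only [Bool.and_eq_true, beq_iff_eq, Bool.not_eq_true'] at h2
        exact ⟨h1, h2.1, h2.2⟩
      have hmarked_one : ∀ p ∈ marked, PVOne g m n p := by
        intro p hp
        obtain ⟨h1, h2, _⟩ := hmarked_mem p hp
        exact ⟨(mem_pvNbrs.mp h1).2, h2⟩
      have hcnmarked : c ∉ marked := fun h => by
        have := (hmarked_mem c h).2.2; rw [hcvis] at this; cases this
      -- hypotheses for the recursive call
      have hlen : queue.length = queue.dropLast.length + 1 := by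
        conv_lhs => rw [hqd]
        simp
      have hfuel' : pvUnvis g m n st.1 + (queue.dropLast ++ marked).length ≤ fuel := by
        have := hfuel
        rw [hlen] at this
        simp only [List.length_append]
        omega
      have hqnod' : (queue.dropLast ++ marked).Nodup := by
        refine List.Nodup.append hrestnod (List.Nodup.filter _ (nodup_pvNbrs m n c.1 c.2)) ?_
        intro p hp1 hp2
        have := (hmarked_mem p hp2).2.2
        have hpq : p ∈ queue := by rw [hqd]; exact List.mem_append_left _ hp1
        rw [(hqmem p hpq).2] at this
        cases this
      have hqmem' : ∀ p ∈ queue.dropLast ++ marked, PVOne g m n p ∧ pvVisGet st.1 p = true := by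
        intro p hp
        rcases List.mem_append.mp hp with h | h
        · have hpq : p ∈ queue := by rw [hqd]; exact List.mem_append_left _ h
          have h1 := hqmem p hpq
          exact ⟨h1.1, (c2 p h1.1.1).mpr (Or.inl h1.2)⟩
        · exact ⟨hmarked_one p h, (c2 p (hmarked_one p h).1).mpr (Or.inr h)⟩
      obtain ⟨Δ', d1, d2, d3, d4, d5, d6, d7, d8, d9, d10, d11, d12⟩ :=
        ih st.1 (queue.dropLast ++ marked) (region ++ [c]) st.2.2.1 st.2.2.2
          hfuel' c1 hqnod' hqmem' c5
      have hRdef : pvFloodA g m n (fuel+1) vis queue region fr w =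
          pvFloodA g m n fuel st.1 st.2.1 (region ++ [c]) st.2.2.1 st.2.2.2 := by
        conv_lhs => rw [pvFloodA]
        rw [hq]
      rw [c3] at hRdef
      refine ⟨c :: Δ', ?_, ?_, ?_, ?_, ?_, ?_, ?_, ?_, ?_, ?_, ?_, ?_⟩ <;>
        (try rw [hRdef])
      · rw [d1]; simp
      · exact d2
      · intro p hp
        rw [d3 p hp, c2 p hp]
        have himp : p ∈ marked → p ∈ Δ' := fun h => d5 p (List.mem_append_right _ h)
        constructor
        · rintro ((h|h)|h)
          · exact Or.inl h
          · exact Or.inr (List.mem_cons_of_mem _ (himp h))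
          · exact Or.inr (List.mem_cons_of_mem _ h)
        · rintro (h|h)
          · exact Or.inl (Or.inl h)
          · rcases List.mem_cons.mp h with h' | h'
            · subst h'; exact Or.inl (Or.inl hcvis)
            · exact Or.inr h'
      · refine List.nodup_cons.mpr ⟨?_, d4⟩
        intro hcΔ
        rcases d7 c hcΔ with h | h
        · rcases List.mem_append.mp h with h' | h'
          · exact hcnrest h'
          · exact hcnmarked h'
        · rw [(c2 c hcone.1).mpr (Or.inl hcvis)] at h; cases h
      · intro p hp
        rw [hqd] at hp
        rcases List.mem_append.mp hp with h | h
        · exact List.mem_cons_of_mem _ (d5 p (List.mem_append_left _ h))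
        · simp only [List.mem_singleton] at h; subst h; exact List.mem_cons_self
      · intro p hp
        rcases List.mem_cons.mp hp with h | h
        · subst h; exact hcone
        · exact d6 p h
      · intro p hp
        rcases List.mem_cons.mp hp with h | h
        · subst h; exact Or.inl hcq
        · rcases d7 p h with h' | h'
          · rcases List.mem_append.mp h' with h'' | h''
            · exact Or.inl (by rw [hqd]; exact List.mem_append_left _ h'')
            · exact Or.inr (hmarked_mem p h'').2.2
          · right
            cases hv : pvVisGet vis p
            · rfl
            · rw [(c2 p (d6 p h).1).mpr (Or.inl hv)] at h'; cases h'
      · intro p hp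
        rcases List.mem_cons.mp hp with h | h
        · refine ⟨c, hcq, ?_⟩
          rw [h]
          exact Relation.ReflTransGen.refl
        · obtain ⟨s, hs, hreach⟩ := d8 p h
          rcases List.mem_append.mp hs with h' | h'
          · exact ⟨s, by rw [hqd]; exact List.mem_append_left _ h', hreach⟩
          · refine ⟨c, hcq, Relation.ReflTransGen.head ?_ hreach⟩
            exact ⟨hcone, hmarked_one s h', (hmarked_mem s h').1⟩
      · intro p hp q hstep
        rcases List.mem_cons.mp hp with h | h
        · subst h
          have hqns : q ∈ ns := hstep.2.2
          have hqin : PVInR m n q := hstep.2.1.1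
          cases hv : pvVisGet vis q
          · have hqmarked : q ∈ marked := by
              rw [hmarked]
              refine List.mem_filter.mpr ⟨hqns, ?_⟩
              simp [hstep.2.1.2, hv]
            exact (d3 q hqin).mpr (Or.inl ((c2 q hqin).mpr (Or.inr hqmarked)))
          · exact (d3 q hqin).mpr (Or.inl ((c2 q hqin).mpr (Or.inl hv)))
        · exact d9 p h q hstep
      · rw [d10, c6]
        have : pvZC g m n c = ((ns.filter (fun q => pvVal g q.1 q.2 == 0)).length : Int) := rfl
        rw [List.map_cons, List.sum_cons, this]
        ring
      · intro t
        rw [d11 t, c4 t]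
        constructor
        · rintro ((h|⟨h1,h2⟩)|⟨p,hp,hz⟩)
          · exact Or.inl h
          · exact Or.inr ⟨c, List.mem_cons_self, h1, h2⟩
          · exact Or.inr ⟨p, List.mem_cons_of_mem _ hp, hz⟩
        · rintro (h|⟨p,hp,hz⟩)
          · exact Or.inl (Or.inl h)
          · rcases List.mem_cons.mp hp with h' | h'
            · subst h'; exact Or.inl (Or.inr ⟨hz.1, hz.2⟩)
            · exact Or.inr ⟨p, h', hz⟩
      · exact d12

-- running A's flood on a fresh start cell: region = reachability class, plus bookkeeping
theorem pvFloodA_full (g : List (List Int)) (m n : Int) (hm : 0 ≤ m) (hn : 0 ≤ n)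
    {vis : List (List Bool)} (hdims : PVDims vis m n)
    (hclosed : ∀ p q, PVInR m n p → pvVisGet vis p = true → PVStep g m n p q →
      pvVisGet vis q = true)
    {c : Int × Int} (hc : PVOne g m n c) (hcv : pvVisGet vis c = false) :
    (let R := pvFloodA g m n ((m*n).toNat + 2) (pvVisSet vis c) [c] [] PySem.Set.empty 0
     PVDims R.1 m n ∧
     R.2.1.Nodup ∧
     (∀ p, p ∈ R.2.1 ↔ PVReach g m n c p) ∧
     (∀ p, PVInR m n p →
       (pvVisGet R.1 p = true ↔ pvVisGet vis p = true ∨ p ∈ R.2.1)) ∧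
     (∀ p q, PVInR m n p → pvVisGet R.1 p = true → PVStep g m n p q →
       pvVisGet R.1 q = true) ∧
     R.2.2.2 = (R.2.1.map (pvZC g m n)).sum ∧
     (∀ t, t ∈ R.2.2.1 ↔ ∃ p ∈ R.2.1, PVZNbr g m n p t) ∧
     R.2.2.1.Nodup) := by
  have hdims0 : PVDims (pvVisSet vis c) m n := PVDims_visSet hdims hc.1
  have hvget : ∀ p, PVInR m n p →
      pvVisGet (pvVisSet vis c) p = (if p = c then true else pvVisGet vis p) :=
    fun p hp => pvVisGet_visSet hdims hc.1 hp
  have hfuel : pvUnvis g m n (pvVisSet vis c) + ([c] : List (Int × Int)).length ≤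
      (m*n).toNat + 2 := by
    have h1 := pvUnvis_visSet hdims hc hcv
    have h2 : pvUnvis g m n vis ≤ (pvCells m n).length := List.length_filter_le _ _
    rw [length_pvCells, ← Int.toNat_mul hm hn] at h2
    simp only [List.length_singleton]
    omega
  obtain ⟨Δ, d1, d2, d3, d4, d5, d6, d7, d8, d9, d10, d11, d12⟩ :=
    pvFloodA_spec g m n ((m*n).toNat + 2) (pvVisSet vis c) [c] [] PySem.Set.empty 0
      hfuel hdims0 (List.nodup_singleton c)
      (by intro p hp; simp only [List.mem_singleton] at hp; rw [hp]
          exact ⟨hc, by rw [hvget c hc.1]; simp⟩)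
      List.nodup_nil
  rw [List.nil_append] at d1
  have hcΔ : c ∈ Δ := d5 c (List.mem_singleton_self c)
  have hvnot : ∀ q, PVReach g m n c q → pvVisGet vis q = false := by
    intro q hreach
    have hescape := pv_reach_avoids (g := g) (m := m) (n := n)
      (V := fun p => pvVisGet vis p = true)
      (fun p q hp hs => hclosed p q hs.1.1 hp hs) (c := c) (d := q)
      (by intro hv; have hv' : pvVisGet vis c = true := hv; rw [hcv] at hv'; cases hv') hreach
    cases hv : pvVisGet vis q
    · rfl
    · exact absurd hv hescape
  have hmemΔ : ∀ p, p ∈ Δ ↔ PVReach g m n c p := by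
    intro p
    constructor
    · intro hp
      obtain ⟨s, hs, hreach⟩ := d8 p hp
      simp only [List.mem_singleton] at hs
      exact hs ▸ hreach
    · intro hreach
      induction hreach with
      | refl => exact hcΔ
      | tail hr hs ihr =>
        rename_i b' q'
        have hq'in : PVInR m n q' := hs.2.1.1
        have := d9 b' ihr q' hs
        rcases (d3 q' hq'in).mp this with h | h
        · rw [hvget q' hq'in] at h
          by_cases hqc : q' = c
          · exact hqc ▸ hcΔ
          · rw [if_neg hqc] at h
            rw [hvnot q' (hr.tail hs)] at h
            cases h
        · exact h
  refine ⟨d2, by rw [d1]; exact d4, by rw [d1]; exact hmemΔ, ?_, ?_,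
    by rw [d1]; simpa using d10, by rw [d1]; intro t; simpa using d11 t, d12⟩
  · intro p hp
    rw [d1, d3 p hp, hvget p hp]
    constructor
    · rintro (h|h)
      · by_cases hpc : p = c
        · exact Or.inr (hpc ▸ hcΔ)
        · rw [if_neg hpc] at h; exact Or.inl h
      · exact Or.inr h
    · rintro (h|h)
      · by_cases hpc : p = c
        · simp [hpc]
        · rw [if_neg hpc]; exact Or.inl h
      · exact Or.inr h
  · intro p q hpin hpvis hstep
    have hqin : PVInR m n q := hstep.2.1.1
    rcases (d3 p hpin).mp hpvis with h | h
    · rw [hvget p hpin] at h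
      by_cases hpc : p = c
      · exact d9 p (hpc ▸ hcΔ) q hstep
      · rw [if_neg hpc] at h
        have := hclosed p q hpin h hstep
        refine (d3 q hqin).mpr (Or.inl ?_)
        rw [hvget q hqin]
        by_cases hqc : q = c <;> simp [hqc, this]
    · exact d9 p h q hstep


-- B's measurement pass -------------------------------------------------------------------------

theorem pvMeasureInner (g : List (List Int)) :
    ∀ (ns : List (Int × Int)) (fr : PySem.Set (Int × Int)) (w : Int), fr.Nodup →
      (let r := ns.foldl (fun fw q =>
        if pvVal g q.1 q.2 == 0 then (PySem.Set.add fw.1 q, fw.2 + 1) else fw) (fr, w)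
       (∀ t, t ∈ r.1 ↔ t ∈ fr ∨ (t ∈ ns ∧ pvVal g t.1 t.2 = 0)) ∧ r.1.Nodup ∧
       r.2 = w + ((ns.filter (fun q => pvVal g q.1 q.2 == 0)).length : Int)) := by
  intro ns
  induction ns with
  | nil => intro fr w hfr; exact ⟨fun t => by simp, hfr, by simp⟩
  | cons q tl ih =>
    intro fr w hfr
    simp only [List.foldl_cons]
    by_cases h0 : pvVal g q.1 q.2 = 0
    · rw [if_pos (by simp [h0])]
      obtain ⟨h1, h2, h3⟩ := ih (PySem.Set.add fr q) (w+1) (PySem.Set.nodup_add fr q hfr)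
      refine ⟨fun t => ?_, h2, ?_⟩
      · rw [h1 t, PySem.Set.mem_add]
        constructor
        · rintro ((h|h)|⟨h,h'⟩)
          · exact Or.inl h
          · exact Or.inr ⟨h ▸ List.mem_cons_self, h ▸ h0⟩
          · exact Or.inr ⟨List.mem_cons_of_mem _ h, h'⟩
        · rintro (h|⟨h,h'⟩)
          · exact Or.inl (Or.inl h)
          · rcases List.mem_cons.mp h with h''|h''
            · exact Or.inl (Or.inr h'')
            · exact Or.inr ⟨h'', h'⟩
      · rw [h3, List.filter_cons, if_pos (by simp [h0])]
        simp only [List.length_cons]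
        push_cast
        ring
    · rw [if_neg (by simp [h0])]
      obtain ⟨h1, h2, h3⟩ := ih fr w hfr
      refine ⟨fun t => ?_, h2, ?_⟩
      · rw [h1 t]
        constructor
        · rintro (h|⟨h,h'⟩)
          · exact Or.inl h
          · exact Or.inr ⟨List.mem_cons_of_mem _ h, h'⟩
        · rintro (h|⟨h,h'⟩)
          · exact Or.inl h
          · rcases List.mem_cons.mp h with h''|h''
            · exact absurd (h'' ▸ h') h0
            · exact Or.inr ⟨h'', h'⟩
      · rw [h3, List.filter_cons, if_neg (by simp [h0])]

theorem pvMeasureFold (g : List (List Int)) (m n : Int) :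
    ∀ (l : List (Int × Int)) (fr : PySem.Set (Int × Int)) (w : Int), fr.Nodup →
      (let r := l.foldl (fun fw c =>
        (pvNbrs m n c.1 c.2).foldl (fun fw q =>
          if pvVal g q.1 q.2 == 0 then (PySem.Set.add fw.1 q, fw.2 + 1) else fw) fw) (fr, w)
       (∀ t, t ∈ r.1 ↔ t ∈ fr ∨ ∃ p ∈ l, PVZNbr g m n p t) ∧ r.1.Nodup ∧
       r.2 = w + (l.map (pvZC g m n)).sum) := by
  intro l
  induction l with
  | nil => intro fr w hfr; exact ⟨fun t => by simp, hfr, by simp⟩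
  | cons c tl ih =>
    intro fr w hfr
    simp only [List.foldl_cons]
    obtain ⟨h1, h2, h3⟩ := pvMeasureInner g (pvNbrs m n c.1 c.2) fr w hfr
    obtain ⟨k1, k2, k3⟩ := ih _ _ h2
    refine ⟨fun t => ?_, k2, ?_⟩
    · rw [k1 t, h1 t]
      constructor
      · rintro ((h|⟨h,h'⟩)|⟨p,hp,hz⟩)
        · exact Or.inl h
        · exact Or.inr ⟨c, List.mem_cons_self, h, h'⟩
        · exact Or.inr ⟨p, List.mem_cons_of_mem _ hp, hz⟩
      · rintro (h|⟨p,hp,hz⟩)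
        · exact Or.inl (Or.inl h)
        · rcases List.mem_cons.mp hp with h''|h''
          · exact Or.inl (Or.inr ⟨h'' ▸ hz.1, hz.2⟩)
          · exact Or.inr ⟨p, h'', hz⟩
    · rw [k3, h3, List.map_cons, List.sum_cons]
      have : pvZC g m n c =
          (((pvNbrs m n c.1 c.2).filter (fun q => pvVal g q.1 q.2 == 0)).length : Int) := rfl
      rw [this]
      ring

theorem pvMeasureB_spec (g : List (List Int)) (m n : Int) (l : List (Int × Int)) :
    (∀ t, t ∈ (pvMeasureB g m n l).1 ↔ ∃ p ∈ l, PVZNbr g m n p t) ∧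
    (pvMeasureB g m n l).1.Nodup ∧
    (pvMeasureB g m n l).2 = (l.map (pvZC g m n)).sum := by
  obtain ⟨h1, h2, h3⟩ := pvMeasureFold g m n l PySem.Set.empty 0 List.nodup_nil
  unfold pvMeasureB
  exact ⟨fun t => by rw [h1 t]; simp [PySem.Set.empty], h2, by rw [h3]; simp⟩

-- two nodup lists with the same members have equal sums of any map
theorem pv_perm_of_mem_iff {l1 l2 : List (Int × Int)} (h1 : l1.Nodup) (h2 : l2.Nodup)
    (h : ∀ x, x ∈ l1 ↔ x ∈ l2) : l1.Perm l2 :=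
  (List.perm_ext_iff_of_nodup h1 h2).mpr h

theorem pv_sum_map_eq {l1 l2 : List (Int × Int)} (f : Int × Int → Int) (h1 : l1.Nodup)
    (h2 : l2.Nodup) (h : ∀ x, x ∈ l1 ↔ x ∈ l2) :
    (l1.map f).sum = (l2.map f).sum :=
  List.Perm.sum_eq (List.Perm.map f (pv_perm_of_mem_iff h1 h2 h))

theorem pv_length_eq {l1 l2 : List (Int × Int)} (h1 : l1.Nodup) (h2 : l2.Nodup)
    (h : ∀ x, x ∈ l1 ↔ x ∈ l2) : l1.length = l2.length :=
  List.Perm.length_eq (pv_perm_of_mem_iff h1 h2 h)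

theorem pv_forall₂_concat {α β : Type} {R : α → β → Prop} {l1 : List α} {l2 : List β}
    {a : α} {b : β} (h : List.Forall₂ R l1 l2) (hab : R a b) :
    List.Forall₂ R (l1 ++ [a]) (l2 ++ [b]) := by
  induction h with
  | nil => exact List.forall₂_cons.mpr ⟨hab, List.Forall₂.nil⟩
  | cons hr _ ih => exact List.forall₂_cons.mpr ⟨hr, ih⟩

-- the per-cell body of A's scan
def pvStepA (g : List (List Int)) (m n : Int)
    (s : List (List Bool) × List (List (Int × Int)) × List (PySem.Set (Int × Int)) × List Int)
    (c : Int × Int) :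
    List (List Bool) × List (List (Int × Int)) × List (PySem.Set (Int × Int)) × List Int :=
  if pvVal g c.1 c.2 == 1 && !(pvVisGet s.1 c) then
    let vis := pvVisSet s.1 c
    let f := pvFloodA g m n ((m*n).toNat + 2) vis [c] [] PySem.Set.empty 0
    (f.1, s.2.1 ++ [f.2.1], s.2.2.1 ++ [f.2.2.1], s.2.2.2 ++ [f.2.2.2])
  else s

-- flattening the two nested scan loops over rows and columns
theorem pv_nested_foldl {α : Type} (f : α → Int × Int → α) (s0 : α) (m n : Int) :
    (PySem.List.pyRange 0 m 1).foldl
      (fun s i => (PySem.List.pyRange 0 n 1).foldl (fun s j => f s (i, j)) s) s0 =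
    (pvCells m n).foldl f s0 := by
  unfold pvCells
  rw [List.foldl_flatMap]
  simp only [List.foldl_map]

theorem pvScanA_eq (g : List (List Int)) (m n : Int) :
    pvScanA g m n =
      (let r := (pvCells m n).foldl (pvStepA g m n)
        (List.replicate m.toNat (List.replicate n.toNat false),
          ([] : List (List (Int × Int))), ([] : List (PySem.Set (Int × Int))), ([] : List Int))
       (r.2.1, r.2.2.1, r.2.2.2)) := by
  unfold pvScanA
  rw [← pv_nested_foldl (pvStepA g m n)]
  rfl

theorem pvScanLab_eq (g : List (List Int)) (m n : Int) :
    pvScanLab g m n = ((pvCells m n).foldl (pvStepLab g) (PySem.Dict.empty, 0)).1 := by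
  unfold pvScanLab
  rw [← pv_nested_foldl (pvStepLab g)]

-- selection of the most threatening region -----------------------------------------------------

theorem pv_max?_first {α : Type} (key : α → Int) :
    ∀ (xs : List α) (d : α), xs ≠ [] →
      ∃ k : Nat, k < xs.length ∧ PySem.List.max? xs key = some (xs.getD k d) ∧
        (∀ j, j < k → key (xs.getD j d) < key (xs.getD k d)) ∧
        (∀ j, j < xs.length → key (xs.getD j d) ≤ key (xs.getD k d)) := by
  intro xs
  induction xs using List.reverseRecOn with
  | nil => intro d h; exact absurd rfl h
  | append_singleton ys y ih =>
    intro d _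
    have hstep : PySem.List.max? (ys ++ [y]) key =
        match PySem.List.max? ys key with
        | none => some y
        | some m => if key m < key y then some y else some m := by
      unfold PySem.List.max?
      rw [List.foldl_append]
      rfl
    by_cases hys : ys = []
    · subst hys
      refine ⟨0, by simp, by simp [PySem.List.max?], fun j hj => absurd hj (by omega), ?_⟩
      intro j hj
      simp only [List.nil_append, List.length_singleton] at hj
      have : j = 0 := by omega
      simp [this]
    · obtain ⟨k, hk, hmax, hstrict, hle⟩ := ih d hys
      have hstep2 : PySem.List.max? (ys ++ [y]) key =
          if key (ys.getD k d) < key y then some y else some (ys.getD k d) := by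
        rw [hstep, hmax]
      by_cases hlt : key (ys.getD k d) < key y
      · refine ⟨ys.length, by simp, ?_, ?_, ?_⟩
        · rw [hstep2, if_pos hlt, List.getD_append_right ys [y] d ys.length le_rfl]
          simp
        · intro j hj
          rw [List.getD_append ys [y] d j hj,
            List.getD_append_right ys [y] d ys.length le_rfl]
          simp only [Nat.sub_self, List.getD_cons_zero]
          exact lt_of_le_of_lt (hle j hj) hlt
        · intro j hj
          simp only [List.length_append, List.length_singleton] at hj
          rw [List.getD_append_right ys [y] d ys.length le_rfl]
          simp only [Nat.sub_self, List.getD_cons_zero]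
          by_cases hjy : j < ys.length
          · rw [List.getD_append ys [y] d j hjy]
            exact le_of_lt (lt_of_le_of_lt (hle j hjy) hlt)
          · have : j = ys.length := by omega
            rw [this, List.getD_append_right ys [y] d ys.length le_rfl]
            simp
      · refine ⟨k, by simp; omega, ?_, ?_, ?_⟩
        · rw [hstep2, if_neg hlt, List.getD_append ys [y] d k hk]
        · intro j hj
          rw [List.getD_append ys [y] d j (by omega), List.getD_append ys [y] d k hk]
          exact hstrict j hj
        · intro j hj
          simp only [List.length_append, List.length_singleton] at hj
          rw [List.getD_append ys [y] d k hk]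
          by_cases hjy : j < ys.length
          · rw [List.getD_append ys [y] d j hjy]
            exact hle j hjy
          · have : j = ys.length := by omega
            rw [this, List.getD_append_right ys [y] d ys.length le_rfl]
            simp only [Nat.sub_self, List.getD_cons_zero]
            exact le_of_not_gt hlt

theorem pv_set_equal_len {s t : PySem.Set (Int × Int)} (h : PySem.Set.equal s t = true)
    (hs : s.Nodup) (ht : t.Nodup) : PySem.Set.len s = PySem.Set.len t := by
  rw [PySem.Set.len_eq, PySem.Set.len_eq]
  exact congrArg _ (List.Perm.length_eq
    ((List.perm_ext_iff_of_nodup hs ht).mpr ((PySem.Set.equal_iff s t).mp h)))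

-- pvIdxOf finds the first-maximum index when lengths strictly grow to it
theorem pvIdxOf_eq :
    ∀ (fs : List (PySem.Set (Int × Int))) (k : Nat) (d : PySem.Set (Int × Int)),
      k < fs.length →
      (∀ j, j < fs.length → (fs.getD j d).Nodup) →
      (∀ j, j < k → PySem.Set.len (fs.getD j d) < PySem.Set.len (fs.getD k d)) →
      pvIdxOf fs (fs.getD k d) = (k : Int) := by
  intro fs
  induction fs with
  | nil => intro k d hk; simp at hk
  | cons f rest ih =>
    intro k d hk hnod hstrict
    cases k with
    | zero =>
      simp only [List.getD_cons_zero, pvIdxOf]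
      rw [if_pos ((PySem.Set.equal_iff f f).mpr (fun x => Iff.rfl))]
      norm_num
    | succ k' =>
      have hne : PySem.Set.equal f ((f :: rest).getD (k'+1) d) = false := by
        cases he : PySem.Set.equal f ((f :: rest).getD (k'+1) d)
        · rfl
        · have h0 := hstrict 0 (by omega)
          simp only [List.getD_cons_zero] at h0
          have := pv_set_equal_len he (by simpa using hnod 0 (by omega))
            (hnod (k'+1) hk)
          omega
      simp only [pvIdxOf]
      rw [if_neg (by rw [hne]; simp)]
      have hrec := ih k' d (by simpa using hk)
        (fun j hj => by simpa using hnod (j+1) (by simp only [List.length_cons]; omega))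
        (fun j hj => by simpa using hstrict (j+1) (by omega))
      simp only [List.getD_cons_succ] at *
      rw [hrec]
      push_cast
      ring

theorem pvBest_aux (groups : List (List (Int × Int) × PySem.Set (Int × Int) × Int)) :
    ∀ r : Nat, r + 1 ≤ groups.length →
      ∃ bk : Nat, bk < r + 1 ∧
        ((List.range r).foldl (fun (best : Int) (j : Nat) =>
          if PySem.Set.len (PySem.List.pyGetD groups (1 + (j : Int)) pvGroupD).2.1 >
             PySem.Set.len (PySem.List.pyGetD groups best pvGroupD).2.1 then 1 + (j : Int)
          else best) 0) = (bk : Int) ∧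
        (∀ j, j < bk → PySem.Set.len ((groups.getD j pvGroupD)).2.1 <
          PySem.Set.len ((groups.getD bk pvGroupD)).2.1) ∧
        (∀ j, j < r + 1 → PySem.Set.len ((groups.getD j pvGroupD)).2.1 ≤
          PySem.Set.len ((groups.getD bk pvGroupD)).2.1) := by
  intro r
  induction r with
  | zero =>
    intro _
    refine ⟨0, by omega, by simp, fun j hj => absurd hj (by omega), ?_⟩
    intro j hj
    have : j = 0 := by omega
    simp [this]
  | succ r ih =>
    intro hr
    obtain ⟨bk, hbk, hfold, hstrict, hle⟩ := ih (by omega)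
    rw [List.range_succ, List.foldl_append, hfold]
    simp only [List.foldl_cons, List.foldl_nil]
    have hcast1 : (1 + (r : Int)) = (((r+1 : Nat)) : Int) := by push_cast; ring
    have hg1 : PySem.List.pyGetD groups (1 + (r : Int)) pvGroupD = groups.getD (r+1) pvGroupD := by
      rw [hcast1, PySem.List.pyGetD_natCast]
    have hg2 : PySem.List.pyGetD groups ((bk : Nat) : Int) pvGroupD = groups.getD bk pvGroupD :=
      PySem.List.pyGetD_natCast groups bk pvGroupD
    by_cases hgt : PySem.Set.len (groups.getD (r+1) pvGroupD).2.1 >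
        PySem.Set.len (groups.getD bk pvGroupD).2.1
    · rw [if_pos (by rw [hg1, hg2]; exact hgt)]
      refine ⟨r+1, by omega, hcast1, ?_, ?_⟩
      · intro j hj
        by_cases hjb : j < bk
        · exact lt_trans (hstrict j hjb) hgt
        · by_cases hjbe : j = bk
          · exact hjbe ▸ hgt
          · exact lt_of_le_of_lt (hle j (by omega)) hgt
      · intro j hj
        by_cases hjr : j < r + 1
        · exact le_of_lt (lt_of_le_of_lt (hle j hjr) hgt)
        · have : j = r + 1 := by omega
          rw [this]
    · rw [if_neg (by rw [hg1, hg2]; exact hgt)]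
      refine ⟨bk, by omega, rfl, hstrict, ?_⟩
      intro j hj
      by_cases hjr : j < r + 1
      · exact hle j hjr
      · have : j = r + 1 := by omega
        rw [this]
        exact le_of_not_gt hgt

theorem pv_firstmax_unique (f : Nat → Int) (L k1 k2 : Nat)
    (hk1 : k1 < L) (h1s : ∀ j, j < k1 → f j < f k1) (h1le : ∀ j, j < L → f j ≤ f k1)
    (hk2 : k2 < L) (h2s : ∀ j, j < k2 → f j < f k2) (h2le : ∀ j, j < L → f j ≤ f k2) :
    k1 = k2 := by
  rcases lt_trichotomy k1 k2 with h | h | h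
  · have := h2s k1 h
    have := h1le k2 hk2
    omega
  · exact h
  · have := h1s k2 h
    have := h2le k1 hk1
    omega


-- grid primitives ------------------------------------------------------------------------------

def PVGShape (g : List (List Int)) (m n : Int) : Prop :=
  (g.length : Int) = m ∧ ∀ row ∈ g, n ≤ (row.length : Int)

theorem pvGShape_of_rowlens {g g' : List (List Int)} {m n : Int}
    (h : g'.map List.length = g.map List.length) (hs : PVGShape g m n) : PVGShape g' m n := by
  obtain ⟨h1, h2⟩ := hs
  constructor
  · have := congrArg List.length h
    simp only [List.length_map] at this
    omega
  · intro row hrow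
    have : row.length ∈ g'.map List.length := List.mem_map_of_mem hrow
    rw [h] at this
    obtain ⟨row', hrow', hlen⟩ := List.mem_map.mp this
    rw [← hlen]
    exact h2 row' hrow'

theorem pvVal_eq_getElem {g : List (List Int)} {a b : Int} (ha : 0 ≤ a)
    (ha2 : a.toNat < g.length) (hb : 0 ≤ b) (hb2 : b.toNat < (g[a.toNat]).length) :
    pvVal g a b = g[a.toNat][b.toNat] := by
  unfold pvVal PySem.List.pyGetD
  rw [PySem.List.pyGet?_of_nonneg _ ha, List.getElem?_eq_getElem ha2, Option.getD_some,
    PySem.List.pyGet?_of_nonneg _ hb, List.getElem?_eq_getElem hb2, Option.getD_some]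

theorem pvGridSet_rowlens {g : List (List Int)} {m n : Int} (hs : PVGShape g m n)
    {c : Int × Int} (hc : PVInR m n c) (v : Int) :
    (pvGridSet g c v).map List.length = g.map List.length := by
  obtain ⟨h1, h2⟩ := hs
  obtain ⟨hca, hcb, hcc, hcd⟩ := hc
  have hc1 : c.1.toNat < g.length := by omega
  unfold pvGridSet
  rw [PySem.List.pySetD_of_nonneg _ _ hca]
  refine List.ext_getElem (by simp) ?_
  intro i hi1 hi2
  simp only [List.getElem_map, List.getElem_set]
  by_cases hie : c.1.toNat = i
  · rw [if_pos hie, PySem.List.pySetD_of_nonneg _ _ hcc,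
      PySem.List.pyGetD_of_nonneg _ _ hca, List.getD_eq_getElem?_getD,
      List.getElem?_eq_getElem hc1, Option.getD_some]
    simp [hie]
  · rw [if_neg hie]

theorem pvVal_gridSet {g : List (List Int)} {m n : Int} (hs : PVGShape g m n)
    {c : Int × Int} (hc : PVInR m n c) (v : Int) {a b : Int}
    (ha : 0 ≤ a) (ham : a < m) (hb : 0 ≤ b) :
    pvVal (pvGridSet g c v) a b = if (a, b) = c then v else pvVal g a b := by
  obtain ⟨h1, h2⟩ := hs
  obtain ⟨hca, hcb, hcc, hcd⟩ := hc
  have hc1 : c.1.toNat < g.length := by omega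
  have ha1 : a.toNat < g.length := by omega
  have hrow : n ≤ ((g[c.1.toNat]).length : Int) := h2 _ (List.getElem_mem hc1)
  have hc2 : c.2.toNat < (g[c.1.toNat]).length := by omega
  unfold pvGridSet pvVal PySem.List.pyGetD
  rw [PySem.List.pyGet?_of_nonneg _ hca, List.getElem?_eq_getElem hc1, Option.getD_some,
    PySem.List.pySetD_of_nonneg _ _ hcc, PySem.List.pySetD_of_nonneg _ _ hca,
    PySem.List.pyGet?_of_nonneg _ ha, PySem.List.pyGet?_of_nonneg _ ha]
  by_cases hfst : a = c.1
  · rw [hfst, List.getElem?_set_self hc1, Option.getD_some,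
      PySem.List.pyGet?_of_nonneg _ hb, PySem.List.pyGet?_of_nonneg _ hb,
      List.getElem?_set]
    by_cases hsnd : b = c.2
    · have hdeq : (c.1, b) = c := by
        rw [hsnd]
      have hteq : c.2.toNat = b.toNat := by omega
      rw [if_pos hteq, ← hteq, if_pos hc2, Option.getD_some, if_pos hdeq]
    · have hdeq : (c.1, b) ≠ c := by
        intro h
        rw [← h] at hsnd
        exact hsnd rfl
      have hne : ¬ (c.2.toNat = b.toNat) := by omega
      simp [hne, hdeq, List.getElem?_eq_getElem hc1]
  · have ht : a.toNat ≠ c.1.toNat := by omega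
    have hdeq : (a, b) ≠ c := by
      intro h; rw [← h] at hfst; exact hfst rfl
    rw [List.getElem?_set_ne (fun h => ht h.symm)]
    simp [hdeq]

-- writing one value over a list of in-range cells
theorem pvWriteAll {m n : Int} (v : Int) :
    ∀ (l : List (Int × Int)) (g : List (List Int)), PVGShape g m n →
      (∀ c ∈ l, PVInR m n c) →
      (let g' := l.foldl (fun g c => pvGridSet g c v) g
       g'.map List.length = g.map List.length ∧
       (∀ a b : Int, 0 ≤ a → a < m → 0 ≤ b →
         pvVal g' a b = if (a, b) ∈ l then v else pvVal g a b)) := by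
  intro l
  induction l with
  | nil => intro g hs _; exact ⟨rfl, fun a b _ _ _ => by simp⟩
  | cons c tl ih =>
    intro g hs hin
    have hc := hin c List.mem_cons_self
    have hs1 : PVGShape (pvGridSet g c v) m n :=
      pvGShape_of_rowlens (pvGridSet_rowlens hs hc v) hs
    obtain ⟨k1, k2⟩ := ih (pvGridSet g c v) hs1 (fun x hx => hin x (List.mem_cons_of_mem _ hx))
    simp only [List.foldl_cons]
    refine ⟨by rw [k1, pvGridSet_rowlens hs hc v], ?_⟩
    intro a b ha ham hb
    rw [k2 a b ha ham hb, pvVal_gridSet hs hc v ha ham hb]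
    by_cases h1 : (a, b) ∈ tl
    · simp [h1]
    · by_cases h2 : (a, b) = c <;> simp [h1, h2]

-- A's quarantine/spread writes -----------------------------------------------------------------

theorem pv_mem_enumerate {α : Type} [Inhabited α] :
    ∀ (rs : List α) (s : Int) (pr : Int × α),
      pr ∈ PySem.List.enumerate rs s ↔
        ∃ j : Nat, j < rs.length ∧ pr = (s + j, rs.getD j default) := by
  intro rs
  induction rs with
  | nil => intro s pr; simp [PySem.List.enumerate_nil]
  | cons r rest ih =>
    intro s pr
    rw [PySem.List.enumerate_cons, List.mem_cons, ih (s+1)]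
    constructor
    · rintro (h | ⟨j, hj, hpr⟩)
      · exact ⟨0, by simp, by simpa using h⟩
      · refine ⟨j+1, by simpa using hj, ?_⟩
        rw [hpr]
        simp only [List.getD_cons_succ]
        congr 1
        push_cast
        ring
    · rintro ⟨j, hj, hpr⟩
      cases j with
      | zero => exact Or.inl (by simpa using hpr)
      | succ j' =>
        refine Or.inr ⟨j', by simpa using hj, ?_⟩
        rw [hpr]
        simp only [List.getD_cons_succ]
        congr 1
        push_cast
        ring

theorem pv_enumerate_ge {α : Type} :
    ∀ (rs : List α) (s : Int) (pr : Int × α), pr ∈ PySem.List.enumerate rs s → s ≤ pr.1 := by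
  intro rs
  induction rs with
  | nil => intro s pr h; simp [PySem.List.enumerate_nil] at h
  | cons r rest ih =>
    intro s pr h
    rw [PySem.List.enumerate_cons, List.mem_cons] at h
    rcases h with h | h
    · rw [h]
    · have := ih (s+1) pr h
      omega

theorem pvUpdateA_aux (m n : Int) (frontiers : List (PySem.Set (Int × Int))) (idx : Int) :
    ∀ (rs : List (List (Int × Int))) (t : Int) (g : List (List Int)), PVGShape g m n →
      (∀ pr ∈ PySem.List.enumerate rs t, (∀ c ∈ pr.2, PVInR m n c) ∧
        (∀ c ∈ PySem.List.pyGetD frontiers pr.1 PySem.Set.empty, PVInR m n c)) →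
      (∀ pr ∈ PySem.List.enumerate rs t, ∀ pr' ∈ PySem.List.enumerate rs t,
        pr.1 = idx → pr'.1 ≠ idx → ∀ c ∈ pr.2,
          c ∉ PySem.List.pyGetD frontiers pr'.1 PySem.Set.empty) →
      (let g' := (PySem.List.enumerate rs t).foldl (fun g ir =>
          if ir.1 == idx then ir.2.foldl (fun g c => pvGridSet g c (-1)) g
          else (PySem.List.pyGetD frontiers ir.1 PySem.Set.empty).foldl
            (fun g c => pvGridSet g c 1) g) g
       g'.map List.length = g.map List.length ∧
       (∀ a b : Int, 0 ≤ a → a < m → 0 ≤ b →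
         ((∃ pr ∈ PySem.List.enumerate rs t, pr.1 = idx ∧ (a, b) ∈ pr.2) →
            pvVal g' a b = -1) ∧
         (¬ (∃ pr ∈ PySem.List.enumerate rs t, pr.1 = idx ∧ (a, b) ∈ pr.2) →
          (∃ pr ∈ PySem.List.enumerate rs t, pr.1 ≠ idx ∧
            (a, b) ∈ PySem.List.pyGetD frontiers pr.1 PySem.Set.empty) →
            pvVal g' a b = 1) ∧
         (¬ (∃ pr ∈ PySem.List.enumerate rs t, pr.1 = idx ∧ (a, b) ∈ pr.2) →
          ¬ (∃ pr ∈ PySem.List.enumerate rs t, pr.1 ≠ idx ∧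
            (a, b) ∈ PySem.List.pyGetD frontiers pr.1 PySem.Set.empty) →
            pvVal g' a b = pvVal g a b))) := by
  intro rs
  induction rs with
  | nil =>
    intro t g hs _ _
    refine ⟨by simp [PySem.List.enumerate_nil], ?_⟩
    intro a b _ _ _
    refine ⟨?_, ?_, fun _ _ => by simp [PySem.List.enumerate_nil]⟩
    · rintro ⟨pr, hpr, _⟩; simp [PySem.List.enumerate_nil] at hpr
    · rintro _ ⟨pr, hpr, _⟩; simp [PySem.List.enumerate_nil] at hpr
  | cons r rest ih =>
    intro t g hs hinr hdisj
    rw [PySem.List.enumerate_cons]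
    simp only [List.foldl_cons]
    have hhead := hinr (t, r) (by rw [PySem.List.enumerate_cons]; exact List.mem_cons_self)
    by_cases hti : t = idx
    · -- quarantine entry
      rw [if_pos (show ((t == idx) = true) from by simp [hti])]
      obtain ⟨w1, w2⟩ := pvWriteAll (m := m) (n := n) (-1) r g hs hhead.1
      have hs1 : PVGShape (r.foldl (fun g c => pvGridSet g c (-1)) g) m n :=
        pvGShape_of_rowlens w1 hs
      obtain ⟨k1, k2⟩ := ih (t+1) _ hs1
        (fun pr hpr => hinr pr (by rw [PySem.List.enumerate_cons]; exact List.mem_cons_of_mem _ hpr))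
        (fun pr hpr pr' hpr' => hdisj pr
          (by rw [PySem.List.enumerate_cons]; exact List.mem_cons_of_mem _ hpr) pr'
          (by rw [PySem.List.enumerate_cons]; exact List.mem_cons_of_mem _ hpr'))
      have hrestne : ∀ pr ∈ PySem.List.enumerate rest (t+1), pr.1 ≠ idx := by
        intro pr hpr
        have := pv_enumerate_ge rest (t+1) pr hpr
        omega
      refine ⟨by rw [k1, w1], ?_⟩
      intro a b ha ham hb
      obtain ⟨q1, q2, q3⟩ := k2 a b ha ham hb
      have hnoq : ¬ (∃ pr ∈ PySem.List.enumerate rest (t+1), pr.1 = idx ∧ (a, b) ∈ pr.2) := by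
        rintro ⟨pr, hpr, he, _⟩
        exact hrestne pr hpr he
      refine ⟨?_, ?_, ?_⟩
      · rintro ⟨pr, hpr, he, hmem⟩
        rcases List.mem_cons.mp hpr with h | h
        · -- the head entry: (a,b) is a quarantined cell
          have habr : (a, b) ∈ r := by rw [h] at hmem; exact hmem
          have hnos : ¬ (∃ pr ∈ PySem.List.enumerate rest (t+1), pr.1 ≠ idx ∧
              (a, b) ∈ PySem.List.pyGetD frontiers pr.1 PySem.Set.empty) := by
            rintro ⟨pr', hpr', hne', hmem'⟩
            exact hdisj (t, r) (by rw [PySem.List.enumerate_cons]; exact List.mem_cons_self)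
              pr' (by rw [PySem.List.enumerate_cons]; exact List.mem_cons_of_mem _ hpr')
              hti hne' (a, b) habr hmem'
          rw [q3 hnoq hnos, w2 a b ha ham hb, if_pos habr]
        · exact absurd he (hrestne pr h)
      · rintro hne ⟨pr, hpr, hprne, hmem⟩
        rcases List.mem_cons.mp hpr with h | h
        · rw [h] at hprne; exact absurd hti hprne
        · exact q2 hnoq ⟨pr, h, hprne, hmem⟩
      · intro hne1 hne2
        have habr : (a, b) ∉ r := by
          intro hmem
          exact hne1 ⟨(t, r), List.mem_cons_self, hti, hmem⟩
        have hnos : ¬ (∃ pr ∈ PySem.List.enumerate rest (t+1), pr.1 ≠ idx ∧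
            (a, b) ∈ PySem.List.pyGetD frontiers pr.1 PySem.Set.empty) := by
          rintro ⟨pr, hpr, hprne, hmem⟩
          exact hne2 ⟨pr, List.mem_cons_of_mem _ hpr, hprne, hmem⟩
        rw [q3 hnoq hnos, w2 a b ha ham hb, if_neg habr]
    · -- spread entry
      rw [if_neg (show ¬ ((t == idx) = true) from by simp [hti])]
      obtain ⟨w1, w2⟩ := pvWriteAll (m := m) (n := n) 1
        (PySem.List.pyGetD frontiers t PySem.Set.empty) g hs hhead.2
      have hs1 : PVGShape ((PySem.List.pyGetD frontiers t PySem.Set.empty).foldl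
          (fun g c => pvGridSet g c 1) g) m n := pvGShape_of_rowlens w1 hs
      obtain ⟨k1, k2⟩ := ih (t+1) _ hs1
        (fun pr hpr => hinr pr (by rw [PySem.List.enumerate_cons]; exact List.mem_cons_of_mem _ hpr))
        (fun pr hpr pr' hpr' => hdisj pr
          (by rw [PySem.List.enumerate_cons]; exact List.mem_cons_of_mem _ hpr) pr'
          (by rw [PySem.List.enumerate_cons]; exact List.mem_cons_of_mem _ hpr'))
      refine ⟨by rw [k1, w1], ?_⟩
      intro a b ha ham hb
      obtain ⟨q1, q2, q3⟩ := k2 a b ha ham hb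
      refine ⟨?_, ?_, ?_⟩
      · rintro ⟨pr, hpr, he, hmem⟩
        rcases List.mem_cons.mp hpr with h | h
        · rw [h] at he; exact absurd he hti
        · exact q1 ⟨pr, h, he, hmem⟩
      · rintro hne ⟨pr, hpr, hprne, hmem⟩
        have hnoq : ¬ (∃ pr ∈ PySem.List.enumerate rest (t+1), pr.1 = idx ∧ (a, b) ∈ pr.2) := by
          rintro ⟨pr', hpr', he', hmem'⟩
          exact hne ⟨pr', List.mem_cons_of_mem _ hpr', he', hmem'⟩
        rcases List.mem_cons.mp hpr with h | h
        · -- head frontier: cell written 1 now, later writes also 1 or none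
          by_cases hrest : ∃ pr ∈ PySem.List.enumerate rest (t+1), pr.1 ≠ idx ∧
              (a, b) ∈ PySem.List.pyGetD frontiers pr.1 PySem.Set.empty
          · exact q2 hnoq hrest
          · rw [q3 hnoq hrest, w2 a b ha ham hb,
              if_pos (by rw [h] at hmem; exact hmem)]
        · exact q2 hnoq ⟨pr, h, hprne, hmem⟩
      · intro hne1 hne2
        have hnoq : ¬ (∃ pr ∈ PySem.List.enumerate rest (t+1), pr.1 = idx ∧ (a, b) ∈ pr.2) := by
          rintro ⟨pr', hpr', he', hmem'⟩
          exact hne1 ⟨pr', List.mem_cons_of_mem _ hpr', he', hmem'⟩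
        have hnos : ¬ (∃ pr ∈ PySem.List.enumerate rest (t+1), pr.1 ≠ idx ∧
            (a, b) ∈ PySem.List.pyGetD frontiers pr.1 PySem.Set.empty) := by
          rintro ⟨pr', hpr', hne', hmem'⟩
          exact hne2 ⟨pr', List.mem_cons_of_mem _ hpr', hne', hmem'⟩
        have hhd : (a, b) ∉ PySem.List.pyGetD frontiers t PySem.Set.empty := by
          intro hmem
          exact hne2 ⟨(t, r), List.mem_cons_self, hti, hmem⟩
        rw [q3 hnoq hnos, w2 a b ha ham hb, if_neg hhd]


-- B's spread set and grid rebuild --------------------------------------------------------------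

theorem pvSpread_aux (groups : List (List (Int × Int) × PySem.Set (Int × Int) × Int))
    (best : Int) :
    ∀ r : Nat,
      (∀ t, t ∈ ((List.range r).foldl (fun (sp : PySem.Set (Int × Int)) (k : Nat) =>
          if (k : Int) ≠ best then PySem.Set.update sp (PySem.List.pyGetD groups (k : Int) pvGroupD).2.1
          else sp) PySem.Set.empty) ↔
        ∃ k : Nat, k < r ∧ (k : Int) ≠ best ∧ t ∈ (groups.getD k pvGroupD).2.1) ∧
      ((List.range r).foldl (fun (sp : PySem.Set (Int × Int)) (k : Nat) =>
          if (k : Int) ≠ best then PySem.Set.update sp (PySem.List.pyGetD groups (k : Int) pvGroupD).2.1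
          else sp) PySem.Set.empty).Nodup := by
  intro r
  induction r with
  | zero =>
    refine ⟨fun t => ?_, List.nodup_nil⟩
    simp [PySem.Set.empty]
  | succ r ih =>
    obtain ⟨h1, h2⟩ := ih
    rw [List.range_succ, List.foldl_append]
    simp only [List.foldl_cons, List.foldl_nil]
    by_cases hrb : (r : Int) ≠ best
    · rw [if_pos hrb]
      refine ⟨fun t => ?_, PySem.Set.nodup_update _ _ h2⟩
      rw [PySem.Set.mem_update, h1 t, PySem.List.pyGetD_natCast]
      constructor
      · rintro (⟨k, hk, hkb, hmem⟩ | h)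
        · exact ⟨k, by omega, hkb, hmem⟩
        · exact ⟨r, by omega, hrb, h⟩
      · rintro ⟨k, hk, hkb, hmem⟩
        by_cases hkr : k < r
        · exact Or.inl ⟨k, hkr, hkb, hmem⟩
        · have : k = r := by omega
          exact Or.inr (this ▸ hmem)
    · rw [if_neg hrb]
      refine ⟨fun t => ?_, h2⟩
      rw [h1 t]
      constructor
      · rintro ⟨k, hk, hkb, hmem⟩
        exact ⟨k, by omega, hkb, hmem⟩
      · rintro ⟨k, hk, hkb, hmem⟩
        by_cases hkr : k < r
        · exact ⟨k, hkr, hkb, hmem⟩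
        · have : k = r := by omega
          exact absurd (this ▸ hkb) (by simpa using hrb)

theorem pvRebuild_spec (g : List (List Int)) (m : Int)
    (quar spread : PySem.Set (Int × Int)) :
    (let g' := (PySem.List.pyRange 0 m 1).map (fun i =>
      (PySem.List.pyRange 0 ((PySem.List.pyGetD g i []).length : Int) 1).map (fun j =>
        if PySem.Set.contains quar (i, j) then -1
        else if PySem.Set.contains spread (i, j) then 1
        else pvVal g i j))
     g'.length = m.toNat ∧
     ∀ (i : Nat) (hi : i < g'.length),
       ∃ hlen : g'[i].length = (g.getD i []).length,
       ∀ (j : Nat) (hj : j < g'[i].length),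
         g'[i][j] =
           (if PySem.Set.contains quar ((i : Int), (j : Int)) then -1
            else if PySem.Set.contains spread ((i : Int), (j : Int)) then 1
            else pvVal g (i : Int) (j : Int))) := by
  refine ⟨by simp [PySem.List.length_pyRange_one], ?_⟩
  intro i hi
  simp only [List.length_map, PySem.List.length_pyRange_one] at hi
  have hgetrow : ∀ (hh : i < ((PySem.List.pyRange 0 m 1).map (fun i =>
      (PySem.List.pyRange 0 ((PySem.List.pyGetD g i []).length : Int) 1).map (fun j =>
        if PySem.Set.contains quar (i, j) then -1
        else if PySem.Set.contains spread (i, j) then 1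
        else pvVal g i j))).length),
      ((PySem.List.pyRange 0 m 1).map (fun i =>
      (PySem.List.pyRange 0 ((PySem.List.pyGetD g i []).length : Int) 1).map (fun j =>
        if PySem.Set.contains quar (i, j) then -1
        else if PySem.Set.contains spread (i, j) then 1
        else pvVal g i j)))[i] =
      (PySem.List.pyRange 0 ((PySem.List.pyGetD g (i : Int) []).length : Int) 1).map (fun j =>
        if PySem.Set.contains quar ((i : Int), j) then -1
        else if PySem.Set.contains spread ((i : Int), j) then 1
        else pvVal g (i : Int) j) := by
    intro hh
    rw [List.getElem_map, PySem.List.getElem_pyRange_one 0 m i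
      (by simpa [PySem.List.length_pyRange_one] using hi)]
    simp
  have hh : i < ((PySem.List.pyRange 0 m 1).map (fun i =>
      (PySem.List.pyRange 0 ((PySem.List.pyGetD g i []).length : Int) 1).map (fun j =>
        if PySem.Set.contains quar (i, j) then -1
        else if PySem.Set.contains spread (i, j) then 1
        else pvVal g i j))).length := by
    simpa [PySem.List.length_pyRange_one] using hi
  rw [hgetrow hh]
  have hrowlen : ((PySem.List.pyRange 0 ((PySem.List.pyGetD g (i : Int) []).length : Int) 1).map
      (fun j =>
        if PySem.Set.contains quar ((i : Int), j) then -1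
        else if PySem.Set.contains spread ((i : Int), j) then 1
        else pvVal g (i : Int) j)).length = (g.getD i []).length := by
    simp [PySem.List.length_pyRange_one, PySem.List.pyGetD_natCast]
  refine ⟨hrowlen, ?_⟩
  intro j hj
  rw [List.getElem_map, PySem.List.getElem_pyRange_one 0 _ j (by
    simpa [List.length_map] using hj)]
  simp

theorem pv_getD_zero_headD (l : List (List Int)) :
    PySem.List.pyGetD l 0 [] = l.headD [] := by
  cases l with
  | nil => rfl
  | cons x xs => simp [PySem.List.pyGetD, PySem.List.pyGet?, PySem.List.pyIdx?]

-- row-major order ------------------------------------------------------------------------------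

def pvRmlt (a b : Int × Int) : Prop := a.1 < b.1 ∨ (a.1 = b.1 ∧ a.2 < b.2)
def pvRmle (a b : Int × Int) : Prop := pvRmlt a b ∨ a = b

theorem pvRmlt_irrefl (a : Int × Int) : ¬ pvRmlt a a := by
  simp [pvRmlt]

theorem pvRmlt_trans {a b c : Int × Int} (h1 : pvRmlt a b) (h2 : pvRmlt b c) : pvRmlt a c := by
  rcases h1 with h1 | ⟨h1, h1'⟩ <;> rcases h2 with h2 | ⟨h2, h2'⟩ <;> simp [pvRmlt] <;> omega

theorem pvRmlt_asymm {a b : Int × Int} (h1 : pvRmlt a b) : ¬ pvRmlt b a := by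
  intro h2
  exact pvRmlt_irrefl a (pvRmlt_trans h1 h2)

theorem pvRm_trichotomy (a b : Int × Int) : pvRmlt a b ∨ a = b ∨ pvRmlt b a := by
  obtain ⟨a1, a2⟩ := a
  obtain ⟨b1, b2⟩ := b
  simp only [pvRmlt, Prod.mk.injEq]
  omega

theorem pvRmle_refl (a : Int × Int) : pvRmle a a := Or.inr rfl

theorem pvRmle_antisymm {a b : Int × Int} (h1 : pvRmle a b) (h2 : pvRmle b a) : a = b := by
  rcases h1 with h1 | h1
  · rcases h2 with h2 | h2
    · exact absurd h2 (pvRmlt_asymm h1)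
    · exact h2.symm
  · exact h1

theorem pvCells_pairwise (m n : Int) : (pvCells m n).Pairwise pvRmlt := by
  unfold pvCells
  rw [List.pairwise_flatMap]
  constructor
  · intro i _
    rw [List.pairwise_map]
    refine (PySem.List.pairwise_lt_pyRange_one 0 n).imp ?_
    intro a b h
    exact Or.inr ⟨rfl, h⟩
  · refine (PySem.List.pairwise_lt_pyRange_one 0 m).imp ?_
    intro i i' h c hc c' hc'
    simp only [List.mem_map] at hc hc'
    obtain ⟨j, _, hj⟩ := hc
    obtain ⟨j', _, hj'⟩ := hc'
    rw [← hj, ← hj']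
    exact Or.inl (by simpa using h)

-- a prefix of the row-major cell list is exactly the set of in-range cells before the cut
theorem pv_prefix_char {m n : Int} {P rest : List (Int × Int)} {c : Int × Int}
    (h : pvCells m n = P ++ c :: rest) :
    (∀ d, PVInR m n d → (d ∈ P ↔ pvRmlt d c)) ∧ c ∉ P ∧ PVInR m n c := by
  have hpw := pvCells_pairwise m n
  rw [h] at hpw
  have hnd := nodup_pvCells m n
  rw [h] at hnd
  have hPc : ∀ d ∈ P, pvRmlt d c := by
    intro d hd
    have := (List.pairwise_append.mp hpw).2.2 d hd c (List.mem_cons_self)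
    exact this
  have hcrest : ∀ d ∈ rest, pvRmlt c d := by
    intro d hd
    have h2 := (List.pairwise_append.mp hpw).2.1
    exact (List.pairwise_cons.mp h2).1 d hd
  have hcP : c ∉ P := by
    intro hc
    exact pvRmlt_irrefl c (hPc c hc)
  have hcin : PVInR m n c := mem_pvCells.mp (by rw [h]; simp)
  refine ⟨fun d hdin => ⟨hPc d, fun hlt => ?_⟩, hcP, hcin⟩
  have hdmem : d ∈ P ++ c :: rest := by rw [← h]; exact mem_pvCells.mpr hdin
  rcases List.mem_append.mp hdmem with hmem | hmem
  · exact hmem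
  · rcases List.mem_cons.mp hmem with hmem | hmem
    · exact absurd (hmem ▸ hlt) (pvRmlt_irrefl c)
    · exact absurd (pvRmlt_trans hlt (hcrest d hmem)) (pvRmlt_irrefl d)

-- every nonempty subfamily of a strictly sorted list has a least member in it
theorem pv_list_min {S : (Int × Int) → Prop} :
    ∀ (L : List (Int × Int)), L.Pairwise pvRmlt →
      ∀ c ∈ L, S c → ∃ r ∈ L, S r ∧ ∀ d ∈ L, S d → pvRmle r d := by
  intro L
  induction L with
  | nil => intro _ c hc; cases hc
  | cons x t ih =>
    intro hpw c hc hSc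
    by_cases hSx : S x
    · refine ⟨x, List.mem_cons_self, hSx, ?_⟩
      intro d hd _
      rcases List.mem_cons.mp hd with h | h
      · exact h ▸ pvRmle_refl x
      · exact Or.inl ((List.pairwise_cons.mp hpw).1 d h)
    · have hct : c ∈ t := by
        rcases List.mem_cons.mp hc with h | h
        · exact absurd (h ▸ hSc) hSx
        · exact h
      obtain ⟨r, hr, hSr, hmin⟩ := ih (List.pairwise_cons.mp hpw).2 c hct hSc
      refine ⟨r, List.mem_cons_of_mem _ hr, hSr, ?_⟩
      intro d hd hSd
      rcases List.mem_cons.mp hd with h | h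
      · exact absurd (h ▸ hSd) hSx
      · exact hmin d h hSd

theorem pv_exists_min {m n : Int} (S : (Int × Int) → Prop) (c : Int × Int) (hc : S c)
    (hsub : ∀ d, S d → PVInR m n d) :
    ∃ r, S r ∧ ∀ d, S d → pvRmle r d := by
  obtain ⟨r, _, hSr, hmin⟩ :=
    pv_list_min (pvCells m n) (pvCells_pairwise m n) c (mem_pvCells.mpr (hsub c hc)) hc
  exact ⟨r, hSr, fun d hSd => hmin d (mem_pvCells.mpr (hsub d hSd)) hSd⟩


-- roots: the row-major least cell of each infected component -----------------------------------

def PVRoot (g : List (List Int)) (m n : Int) (r : Int × Int) : Prop :=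
  PVOne g m n r ∧ ∀ d, PVReach g m n r d → pvRmle r d

theorem pvRoot_unique {g : List (List Int)} {m n : Int} {r r' : Int × Int}
    (h1 : PVRoot g m n r) (h2 : PVRoot g m n r') (h : PVReach g m n r r') : r = r' :=
  pvRmle_antisymm (h1.2 r' h) (h2.2 r (pv_reach_symm h))

theorem pv_exists_root {g : List (List Int)} {m n : Int} {c : Int × Int} (hc : PVOne g m n c) :
    ∃ r, PVRoot g m n r ∧ PVReach g m n r c := by
  obtain ⟨r, hSr, hmin⟩ := pv_exists_min (m := m) (n := n) (PVReach g m n c) c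
    Relation.ReflTransGen.refl (fun d hd => (pv_reach_one hc hd).1)
  refine ⟨r, ⟨pv_reach_one hc hSr, ?_⟩, pv_reach_symm hSr⟩
  intro d hd
  exact hmin d (Relation.ReflTransGen.trans hSr hd)

-- characterization of A's scan: one region per root, in row-major root order -------------------

def PVRegRel (g : List (List Int)) (m n : Int) (reg : List (Int × Int)) (r : Int × Int) : Prop :=
  reg.Nodup ∧ ∀ p, p ∈ reg ↔ PVReach g m n r p

def PVFrRel (g : List (List Int)) (m n : Int) (fr : PySem.Set (Int × Int)) (r : Int × Int) : Prop :=
  fr.Nodup ∧ ∀ t, t ∈ fr ↔ ∃ p, PVReach g m n r p ∧ PVZNbr g m n p t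

def PVWRel (g : List (List Int)) (m n : Int) (w : Int) (r : Int × Int) : Prop :=
  ∃ l : List (Int × Int), l.Nodup ∧ (∀ p, p ∈ l ↔ PVReach g m n r p) ∧
    w = (l.map (pvZC g m n)).sum

def PVInvA (g : List (List Int)) (m n : Int) (P : List (Int × Int))
    (s : List (List Bool) × List (List (Int × Int)) × List (PySem.Set (Int × Int)) × List Int)
    (R : List (Int × Int)) : Prop :=
  PVDims s.1 m n ∧
  R.Pairwise pvRmlt ∧
  (∀ r, r ∈ R ↔ (PVRoot g m n r ∧ r ∈ P)) ∧
  (∀ p, PVInR m n p → (pvVisGet s.1 p = true ↔ ∃ r ∈ R, PVReach g m n r p)) ∧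
  List.Forall₂ (PVRegRel g m n) s.2.1 R ∧
  List.Forall₂ (PVFrRel g m n) s.2.2.1 R ∧
  List.Forall₂ (PVWRel g m n) s.2.2.2 R

theorem pvInvA_step {g : List (List Int)} {m n : Int} (hm : 0 ≤ m) (hn : 0 ≤ n)
    {P rest : List (Int × Int)} {c : Int × Int}
    (hsplit : pvCells m n = P ++ c :: rest)
    {s : List (List Bool) × List (List (Int × Int)) × List (PySem.Set (Int × Int)) × List Int}
    {R : List (Int × Int)} (hinv : PVInvA g m n P s R) :
    ∃ R', PVInvA g m n (P ++ [c]) (pvStepA g m n s c) R' := by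
  obtain ⟨hdims, hpw, hroots, hvis, hreg, hfr, hw⟩ := hinv
  obtain ⟨hprefix, hcP, hcin⟩ := pv_prefix_char hsplit
  have hRP : ∀ r ∈ R, r ∈ P := fun r hr => ((hroots r).mp hr).2
  have hclosed : ∀ p q, PVInR m n p → pvVisGet s.1 p = true → PVStep g m n p q →
      pvVisGet s.1 q = true := by
    intro p q hp hvp hstep
    obtain ⟨r, hr, hreach⟩ := (hvis p hp).mp hvp
    exact (hvis q hstep.2.1.1).mpr ⟨r, hr, hreach.tail hstep⟩
  have hmemP' : ∀ r : Int × Int, r ∈ P ++ [c] ↔ (r ∈ P ∨ r = c) := by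
    intro r; simp
  by_cases hguard : (pvVal g c.1 c.2 == 1 && !(pvVisGet s.1 c)) = true
  · -- trigger: c is the least cell of a fresh component
    have hval : pvVal g c.1 c.2 = 1 := by
      simp only [Bool.and_eq_true, beq_iff_eq] at hguard; exact hguard.1
    have hnvis : pvVisGet s.1 c = false := by
      simp only [Bool.and_eq_true, Bool.not_eq_true'] at hguard; exact hguard.2
    have hcone : PVOne g m n c := ⟨hcin, hval⟩
    -- c is a root
    have hcroot : PVRoot g m n c := by
      obtain ⟨e, heroot, hereach⟩ := pv_exists_root hcone
      have he : e = c := by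
        by_contra hne
        have hec : pvRmlt e c := by
          rcases heroot.2 c hereach with h | h
          · exact h
          · exact absurd h hne
        have heP : e ∈ P := (hprefix e heroot.1.1).mpr hec
        have heR : e ∈ R := (hroots e).mpr ⟨heroot, heP⟩
        have : pvVisGet s.1 c = true := (hvis c hcin).mpr ⟨e, heR, hereach⟩
        rw [hnvis] at this; cases this
      exact he ▸ heroot
    obtain ⟨a1, a2, a3, a4, a5, a6, a7, a8⟩ := pvFloodA_full g m n hm hn hdims hclosed hcone hnvis
    refine ⟨R ++ [c], ?_, ?_, ?_, ?_, ?_, ?_, ?_⟩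
    · rw [pvStepA, if_pos hguard]; exact a1
    · rw [List.pairwise_append]
      refine ⟨hpw, List.pairwise_singleton _ _, ?_⟩
      intro r hr x hx
      rw [List.mem_singleton] at hx
      subst hx
      exact (hprefix r ((hroots r).mp hr).1.1.1).mp (hRP r hr)
    · intro r
      rw [List.mem_append, List.mem_singleton, hroots r, hmemP' r]
      constructor
      · rintro (⟨h1, h2⟩ | h)
        · exact ⟨h1, Or.inl h2⟩
        · exact ⟨h ▸ hcroot, Or.inr h⟩
      · rintro ⟨h1, h2 | h2⟩
        · exact Or.inl ⟨h1, h2⟩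
        · exact Or.inr h2
    · intro p hp
      rw [pvStepA, if_pos hguard]
      simp only []
      rw [a4 p hp, hvis p hp]
      constructor
      · rintro (⟨r, hr, hreach⟩ | h)
        · exact ⟨r, List.mem_append_left _ hr, hreach⟩
        · exact ⟨c, List.mem_append_right _ (List.mem_singleton_self c), (a3 p).mp h⟩
      · rintro ⟨r, hr, hreach⟩
        rcases List.mem_append.mp hr with h | h
        · exact Or.inl ⟨r, h, hreach⟩
        · rw [List.mem_singleton] at h
          exact Or.inr ((a3 p).mpr (h ▸ hreach))
    · rw [pvStepA, if_pos hguard]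
      exact pv_forall₂_concat hreg ⟨a2, a3⟩
    · rw [pvStepA, if_pos hguard]
      refine pv_forall₂_concat hfr ⟨a8, ?_⟩
      intro t
      rw [a7 t]
      constructor
      · rintro ⟨p, hp, hz⟩; exact ⟨p, (a3 p).mp hp, hz⟩
      · rintro ⟨p, hp, hz⟩; exact ⟨p, (a3 p).mpr hp, hz⟩
    · rw [pvStepA, if_pos hguard]
      refine pv_forall₂_concat hw ?_
      exact ⟨_, a2, a3, a6⟩
  · -- skip: c is either not infected or already visited, so not a new root
    have hstep : pvStepA g m n s c = s := by
      rw [pvStepA, if_neg hguard]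
    have hcnotroot : ¬ (PVRoot g m n c) := by
      intro hcroot
      have hval : pvVal g c.1 c.2 = 1 := hcroot.1.2
      have hvisc : pvVisGet s.1 c = true := by
        cases hv : pvVisGet s.1 c
        · exact absurd (by simp [hval, hv]) hguard
        · rfl
      obtain ⟨r, hr, hreach⟩ := (hvis c hcin).mp hvisc
      have hrroot := ((hroots r).mp hr).1
      have : r = c := pvRoot_unique hrroot hcroot hreach
      exact hcP (this ▸ hRP r hr)
    rw [hstep]
    refine ⟨R, hdims, hpw, ?_, hvis, hreg, hfr, hw⟩
    intro r
    rw [hroots r, hmemP' r]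
    constructor
    · rintro ⟨h1, h2⟩; exact ⟨h1, Or.inl h2⟩
    · rintro ⟨h1, h2 | h2⟩
      · exact ⟨h1, h2⟩
      · exact absurd (h2 ▸ h1) hcnotroot

theorem pvInvA_fold {g : List (List Int)} {m n : Int} (hm : 0 ≤ m) (hn : 0 ≤ n) :
    ∀ (rest P : List (Int × Int))
      (s : List (List Bool) × List (List (Int × Int)) × List (PySem.Set (Int × Int)) × List Int)
      (R : List (Int × Int)),
      pvCells m n = P ++ rest → PVInvA g m n P s R →
      ∃ R', PVInvA g m n (P ++ rest) (rest.foldl (pvStepA g m n) s) R' := by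
  intro rest
  induction rest with
  | nil => intro P s R h hinv; exact ⟨R, by simpa using hinv⟩
  | cons c t ih =>
    intro P s R h hinv
    obtain ⟨R', hR'⟩ := pvInvA_step hm hn h hinv
    obtain ⟨R'', hR''⟩ := ih (P ++ [c]) (pvStepA g m n s c) R' (by rw [h]; simp) hR'
    refine ⟨R'', ?_⟩
    rw [List.foldl_cons]
    have : P ++ c :: t = (P ++ [c]) ++ t := by simp
    rw [this]
    exact hR''

theorem pvScanA_char (g : List (List Int)) (m n : Int) (hm : 0 ≤ m) (hn : 0 ≤ n) :
    ∃ R : List (Int × Int),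
      R.Pairwise pvRmlt ∧
      (∀ r, r ∈ R ↔ PVRoot g m n r) ∧
      List.Forall₂ (PVRegRel g m n) (pvScanA g m n).1 R ∧
      List.Forall₂ (PVFrRel g m n) (pvScanA g m n).2.1 R ∧
      List.Forall₂ (PVWRel g m n) (pvScanA g m n).2.2 R := by
  have hinit : PVInvA g m n []
      (List.replicate m.toNat (List.replicate n.toNat false),
        ([] : List (List (Int × Int))), ([] : List (PySem.Set (Int × Int))), ([] : List Int))
      [] := by
    refine ⟨PVDims_replicate hm hn, List.Pairwise.nil, ?_, ?_, List.Forall₂.nil,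
      List.Forall₂.nil, List.Forall₂.nil⟩
    · intro r; simp
    · intro p _
      rw [pvVisGet_replicate]
      simp
  obtain ⟨R, h1, h2, h3, h4, h5, h6, h7⟩ :=
    pvInvA_fold hm hn (pvCells m n) [] _ [] (by simp) hinit
  refine ⟨R, h2, ?_, ?_, ?_, ?_⟩
  · intro r
    rw [h3 r]
    constructor
    · exact fun h => h.1
    · intro h
      exact ⟨h, by simpa using mem_pvCells.mpr h.1.1⟩
  · rw [pvScanA_eq]; exact h5
  · rw [pvScanA_eq]; exact h6
  · rw [pvScanA_eq]; exact h7

-- B-side: creators and label numbering ---------------------------------------------------------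

def pvOneB (g : List (List Int)) (m n : Int) (c : Int × Int) : Bool :=
  decide (0 ≤ c.1) && decide (c.1 < m) && decide (0 ≤ c.2) && decide (c.2 < n) &&
    (pvVal g c.1 c.2 == 1)

theorem pvOneB_iff {g : List (List Int)} {m n : Int} {c : Int × Int} :
    pvOneB g m n c = true ↔ PVOne g m n c := by
  simp only [pvOneB, Bool.and_eq_true, decide_eq_true_eq, beq_iff_eq, PVOne, PVInR]
  tauto

def pvUpC (c : Int × Int) : Int × Int := (c.1 - 1, c.2)
def pvLfC (c : Int × Int) : Int × Int := (c.1, c.2 - 1)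

-- a creator cell: infected, with neither its up nor its left neighbour infected
def pvCreatorB (g : List (List Int)) (m n : Int) (c : Int × Int) : Bool :=
  pvOneB g m n c && !pvOneB g m n (pvUpC c) && !pvOneB g m n (pvLfC c)

def pvRmltB (a b : Int × Int) : Bool :=
  decide (a.1 < b.1) || (decide (a.1 = b.1) && decide (a.2 < b.2))

theorem pvRmltB_iff {a b : Int × Int} : pvRmltB a b = true ↔ pvRmlt a b := by
  simp [pvRmltB, pvRmlt]

-- the label a component ends up with: how many creators precede its root in row-major order
def pvLab (g : List (List Int)) (m n : Int) (r : Int × Int) : Int :=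
  (((pvCells m n).filter (fun d => pvCreatorB g m n d && pvRmltB d r)).length : Int)

theorem pvLab_lt {g : List (List Int)} {m n : Int} {r s : Int × Int}
    (hr : pvCreatorB g m n r = true) (hrin : PVInR m n r) (h : pvRmlt r s) :
    pvLab g m n r < pvLab g m n s := by
  obtain ⟨l1, l2, hsp⟩ := List.append_of_mem (mem_pvCells.mpr hrin)
  have hmono : ∀ l : List (Int × Int),
      (l.filter (fun d => pvCreatorB g m n d && pvRmltB d r)).length ≤
      (l.filter (fun d => pvCreatorB g m n d && pvRmltB d s)).length := by
    intro l
    rw [← List.countP_eq_length_filter, ← List.countP_eq_length_filter]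
    refine List.countP_mono_left ?_
    intro d _ hd
    simp only [Bool.and_eq_true] at hd ⊢
    exact ⟨hd.1, pvRmltB_iff.mpr (pvRmlt_trans (pvRmltB_iff.mp hd.2) h)⟩
  have hrr : (pvCreatorB g m n r && pvRmltB r r) = false := by
    have : pvRmltB r r = false := by
      cases hb : pvRmltB r r
      · rfl
      · exact absurd (pvRmltB_iff.mp hb) (pvRmlt_irrefl r)
    simp [this]
  have hrs : (pvCreatorB g m n r && pvRmltB r s) = true := by
    simp [hr, pvRmltB_iff.mpr h]
  unfold pvLab
  rw [hsp, ← List.countP_eq_length_filter, ← List.countP_eq_length_filter,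
    List.countP_append, List.countP_append, List.countP_cons, List.countP_cons, hrr, hrs]
  have h1 := hmono l1
  have h2 := hmono l2
  rw [← List.countP_eq_length_filter, ← List.countP_eq_length_filter] at h1 h2
  simp only [Bool.false_eq_true, if_false, if_true, reduceIte]
  push_cast
  omega

theorem pvLab_lt_iff {g : List (List Int)} {m n : Int} {r s : Int × Int}
    (hr : pvCreatorB g m n r = true) (hrin : PVInR m n r)
    (hs : pvCreatorB g m n s = true) (hsin : PVInR m n s) :
    pvLab g m n r < pvLab g m n s ↔ pvRmlt r s := by
  constructor
  · intro h
    rcases pvRm_trichotomy r s with ht | ht | ht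
    · exact ht
    · rw [ht] at h; omega
    · have := pvLab_lt hs hsin ht; omega
  · exact pvLab_lt hr hrin

theorem pvLab_inj {g : List (List Int)} {m n : Int} {r s : Int × Int}
    (hr : pvCreatorB g m n r = true) (hrin : PVInR m n r)
    (hs : pvCreatorB g m n s = true) (hsin : PVInR m n s)
    (h : pvLab g m n r = pvLab g m n s) : r = s := by
  rcases pvRm_trichotomy r s with ht | ht | ht
  · have := pvLab_lt hr hrin ht; omega
  · exact ht
  · have := pvLab_lt hs hsin ht; omega

-- roots are creators
theorem pvRoot_creator {g : List (List Int)} {m n : Int} {r : Int × Int}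
    (h : PVRoot g m n r) : pvCreatorB g m n r = true := by
  have hone : pvOneB g m n r = true := pvOneB_iff.mpr h.1
  have hnbr : ∀ q, (q = pvUpC r ∨ q = pvLfC r) → ¬ PVOne g m n q := by
    intro q hq hqone
    have hqnbr : q ∈ pvNbrs m n r.1 r.2 := by
      refine mem_pvNbrs.mpr ⟨?_, hqone.1⟩
      rcases hq with h' | h' <;> subst h'
      · exact Or.inl rfl
      · exact Or.inr (Or.inr (Or.inl rfl))
    have hstep : PVStep g m n r q := ⟨h.1, hqone, hqnbr⟩
    have hle := h.2 q (Relation.ReflTransGen.single hstep)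
    have hlt : pvRmlt q r := by
      rcases hq with h' | h' <;> subst h' <;> simp [pvRmlt, pvUpC, pvLfC] <;> omega
    rcases hle with h' | h'
    · exact pvRmlt_asymm h' hlt
    · rw [← h'] at hlt
      exact pvRmlt_irrefl r hlt
  have hup : pvOneB g m n (pvUpC r) = false := by
    cases hb : pvOneB g m n (pvUpC r)
    · rfl
    · exact absurd (pvOneB_iff.mp hb) (hnbr _ (Or.inl rfl))
  have hlf : pvOneB g m n (pvLfC r) = false := by
    cases hb : pvOneB g m n (pvLfC r)
    · rfl
    · exact absurd (pvOneB_iff.mp hb) (hnbr _ (Or.inr rfl))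
  simp [pvCreatorB, hone, hup, hlf]


-- reachability restricted to the processed prefix ----------------------------------------------

def PVStepIn (g : List (List Int)) (m n : Int) (P : List (Int × Int)) (p q : Int × Int) : Prop :=
  PVStep g m n p q ∧ p ∈ P ∧ q ∈ P

def PVReachIn (g : List (List Int)) (m n : Int) (P : List (Int × Int)) :
    Int × Int → Int × Int → Prop :=
  Relation.ReflTransGen (PVStepIn g m n P)

theorem pvStepIn_symm {g : List (List Int)} {m n : Int} {P : List (Int × Int)} {p q : Int × Int}
    (h : PVStepIn g m n P p q) : PVStepIn g m n P q p :=
  ⟨h.1.symm', h.2.2, h.2.1⟩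

theorem pvReachIn_symm {g : List (List Int)} {m n : Int} {P : List (Int × Int)} {p q : Int × Int}
    (h : PVReachIn g m n P p q) : PVReachIn g m n P q p := by
  induction h with
  | refl => exact Relation.ReflTransGen.refl
  | tail _ hs ih => exact Relation.ReflTransGen.head (pvStepIn_symm hs) ih

theorem pvReachIn_mono {g : List (List Int)} {m n : Int} {P Q : List (Int × Int)}
    (hsub : ∀ x, x ∈ P → x ∈ Q) {p q : Int × Int} (h : PVReachIn g m n P p q) :
    PVReachIn g m n Q p q := by
  refine Relation.ReflTransGen.mono ?_ h
  intro x y hxy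
  exact ⟨hxy.1, hsub x hxy.2.1, hsub y hxy.2.2⟩

theorem pvReachIn_to_reach {g : List (List Int)} {m n : Int} {P : List (Int × Int)}
    {p q : Int × Int} (h : PVReachIn g m n P p q) : PVReach g m n p q :=
  Relation.ReflTransGen.mono (fun _ _ hxy => hxy.1) h

theorem pvReachIn_full {g : List (List Int)} {m n : Int} {p q : Int × Int}
    (hp : PVOne g m n p) (h : PVReach g m n p q) : PVReachIn g m n (pvCells m n) p q := by
  induction h with
  | refl => exact Relation.ReflTransGen.refl
  | tail _ hs ih =>
    exact ih.tail ⟨hs, mem_pvCells.mpr hs.1.1, mem_pvCells.mpr hs.2.1.1⟩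

-- endpoints of nonempty restricted paths lie in the set
theorem pvReachIn_mem {g : List (List Int)} {m n : Int} {P : List (Int × Int)} {p q : Int × Int}
    (h : PVReachIn g m n P p q) (hne : p ≠ q) : q ∈ P := by
  induction h with
  | refl => exact absurd rfl hne
  | tail _ hs _ => exact hs.2.2

-- a neighbour is never the cell itself
theorem pv_nbr_ne {m n x y : Int} {q : Int × Int} (h : q ∈ pvNbrs m n x y) : q ≠ (x, y) := by
  rcases (mem_pvNbrs.mp h).1 with h' | h' | h' | h' <;> subst h' <;>
    simp only [ne_eq, Prod.mk.injEq, not_and] <;> omega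

-- the merge branch's relabel loop over the dict ------------------------------------------------

theorem pvRelabelFold_get? (drop keep : Int) :
    ∀ (l : List ((Int × Int) × Int)) (d : PySem.Dict (Int × Int) Int) (x : Int × Int),
      (l.map Prod.fst).Nodup →
      (l.foldl (fun d cl => if cl.2 == drop then d.insert cl.1 keep else d) d).get? x =
        if (x, drop) ∈ l then some keep else d.get? x := by
  intro l
  induction l with
  | nil => intro d x _; simp
  | cons p t ih =>
    intro d x hnd
    rw [show ((p :: t).map Prod.fst) = p.1 :: t.map Prod.fst from rfl, List.nodup_cons] at hnd
    simp only [List.foldl_cons, List.mem_cons]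
    by_cases hpd : p.2 = drop
    · rw [if_pos (by simp [hpd])]
      rw [ih _ x hnd.2]
      by_cases hx : x = p.1
      · have hxd : (x, drop) = p := by
          rw [hx, ← hpd]
        have hnt : (x, drop) ∉ t := by
          intro hm
          have hmm := List.mem_map_of_mem (f := Prod.fst) hm
          exact hnd.1 (hx ▸ hmm)
        rw [if_neg hnt, PySem.Dict.get?_insert, if_pos hx, if_pos (Or.inl hxd)]
      · rw [PySem.Dict.get?_insert, if_neg hx]
        have hxp : (x, drop) ≠ p := fun h => hx (congrArg Prod.fst h)
        by_cases hxt : (x, drop) ∈ t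
        · rw [if_pos hxt, if_pos (Or.inr hxt)]
        · rw [if_neg hxt, if_neg (by rintro (h | h); exacts [hxp h, hxt h])]
    · rw [if_neg (by simp [hpd])]
      rw [ih _ x hnd.2]
      have hxp : (x, drop) ≠ p := fun h => hpd (congrArg Prod.snd h).symm
      by_cases hxt : (x, drop) ∈ t
      · rw [if_pos hxt, if_pos (Or.inr hxt)]
      · rw [if_neg hxt, if_neg (by rintro (h | h); exacts [hxp h, hxt h])]

theorem pvRelabelFold_keys (drop keep : Int) :
    ∀ (l : List ((Int × Int) × Int)) (d : PySem.Dict (Int × Int) Int),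
      (∀ p ∈ l, p.1 ∈ d.keys) →
      (l.foldl (fun d cl => if cl.2 == drop then d.insert cl.1 keep else d) d).keys = d.keys := by
  intro l
  induction l with
  | nil => intro d _; rfl
  | cons p t ih =>
    intro d hmem
    simp only [List.foldl_cons]
    by_cases hpd : (p.2 == drop) = true
    · rw [if_pos hpd]
      have hcont : d.contains p.1 = true :=
        (PySem.Dict.contains_iff_mem_keys _ _).mpr (hmem p List.mem_cons_self)
      have hkeys : (d.insert p.1 keep).keys = d.keys :=
        PySem.Dict.keys_insert_of_contains _ _ hcont
      rw [ih _ (fun q hq => by rw [hkeys]; exact hmem q (List.mem_cons_of_mem _ hq)), hkeys]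
    · rw [if_neg hpd]
      exact ih _ (fun q hq => hmem q (List.mem_cons_of_mem _ hq))

theorem pvRelabel_get? (comp : PySem.Dict (Int × Int) Int) (hk : comp.keys.Nodup)
    (drop keep : Int) (x : Int × Int) :
    (comp.items.foldl (fun d cl => if cl.2 == drop then d.insert cl.1 keep else d) comp).get? x
      = (comp.get? x).map (fun l => if l = drop then keep else l) := by
  have hnd : (comp.items.map Prod.fst).Nodup := by
    simpa [PySem.Dict.keys] using hk
  rw [pvRelabelFold_get? drop keep comp.items comp x hnd]
  cases hg : comp.get? x with
  | none =>
    rw [if_neg, Option.map_none]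
    intro hm
    rw [PySem.Dict.get?_of_mem_items _ hm hk] at hg
    cases hg
  | some v =>
    by_cases hv : v = drop
    · subst hv
      rw [if_pos (PySem.Dict.mem_items_of_get?_eq_some _ hg)]
      simp
    · rw [if_neg, Option.map_some]
      · simp [hv]
      · intro hm
        rw [PySem.Dict.get?_of_mem_items _ hm hk] at hg
        have : v = drop := by cases hg; rfl
        exact hv this

theorem pvRelabel_keys (comp : PySem.Dict (Int × Int) Int) (drop keep : Int) :
    (comp.items.foldl (fun d cl => if cl.2 == drop then d.insert cl.1 keep else d) comp).keys
      = comp.keys :=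
  pvRelabelFold_keys drop keep comp.items comp
    (fun p hp => PySem.Dict.mem_keys_of_mem_items _ hp)

-- B's labelling invariant ----------------------------------------------------------------------

def PVInvB (g : List (List Int)) (m n : Int) (P : List (Int × Int))
    (comp : PySem.Dict (Int × Int) Int) (nxt : Int) : Prop :=
  comp.keys.Nodup ∧
  (∀ c, (comp.get? c).isSome = true ↔ (c ∈ P ∧ PVOne g m n c)) ∧
  (∀ c l, comp.get? c = some l → ∃ r, r ∈ P ∧ PVOne g m n r ∧ PVReachIn g m n P r c ∧
      (∀ d, PVReachIn g m n P c d → pvRmle r d) ∧ pvCreatorB g m n r = true ∧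
      l = pvLab g m n r) ∧
  nxt = ((P.filter (pvCreatorB g m n)).length : Int)

theorem pvInvB_label_class {g : List (List Int)} {m n : Int} {P : List (Int × Int)}
    {comp : PySem.Dict (Int × Int) Int} {nxt : Int} (hinv : PVInvB g m n P comp nxt)
    {x y : Int × Int} {l : Int} (hx : comp.get? x = some l) (hy : comp.get? y = some l) :
    PVReachIn g m n P x y := by
  obtain ⟨rx, _, hx2, hx3, _, hx5, hx6⟩ := hinv.2.2.1 x l hx
  obtain ⟨ry, _, hy2, hy3, _, hy5, hy6⟩ := hinv.2.2.1 y l hy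
  have heq : rx = ry := pvLab_inj hx5 hx2.1 hy5 hy2.1 (by rw [← hx6, ← hy6])
  exact Relation.ReflTransGen.trans (pvReachIn_symm hx3) (heq ▸ hy3)

theorem pvInvB_class_label {g : List (List Int)} {m n : Int} {P : List (Int × Int)}
    {comp : PySem.Dict (Int × Int) Int} {nxt : Int} (hinv : PVInvB g m n P comp nxt)
    {x y : Int × Int} {l : Int} (hx : comp.get? x = some l)
    (hreach : PVReachIn g m n P x y) : comp.get? y = some l := by
  by_cases hxy : x = y
  · exact hxy ▸ hx
  have hxk : (comp.get? x).isSome = true := by rw [hx]; rfl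
  obtain ⟨hxP, hxone⟩ := (hinv.2.1 x).mp hxk
  have hyP : y ∈ P := pvReachIn_mem hreach hxy
  have hyone : PVOne g m n y := pv_reach_one hxone (pvReachIn_to_reach hreach)
  have hyk : (comp.get? y).isSome = true := (hinv.2.1 y).mpr ⟨hyP, hyone⟩
  obtain ⟨l', hl'⟩ := Option.isSome_iff_exists.mp hyk
  obtain ⟨rx, _, hx2, hx3, hx4, hx5, hx6⟩ := hinv.2.2.1 x l hx
  obtain ⟨ry, _, hy2, hy3, hy4, hy5, hy6⟩ := hinv.2.2.1 y l' hl'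
  have h1 : pvRmle rx ry :=
    hx4 ry (Relation.ReflTransGen.trans hreach (pvReachIn_symm hy3))
  have h2 : pvRmle ry rx :=
    hy4 rx (Relation.ReflTransGen.trans (pvReachIn_symm hreach) (pvReachIn_symm hx3))
  have heq : rx = ry := pvRmle_antisymm h1 h2
  rw [hl', hy6, ← heq, ← hx6]

-- the present neighbours of the new cell
def PVNbrIn (g : List (List Int)) (m n : Int) (P : List (Int × Int)) (c q : Int × Int) : Prop :=
  (q = pvUpC c ∨ q = pvLfC c) ∧ PVOne g m n q ∧ q ∈ P

theorem pv_nbrIn_mem_nbrs {g : List (List Int)} {m n : Int} {P : List (Int × Int)}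
    {c q : Int × Int} (h : PVNbrIn g m n P c q) : q ∈ pvNbrs m n c.1 c.2 := by
  refine mem_pvNbrs.mpr ⟨?_, h.2.1.1⟩
  rcases h.1 with h' | h' <;> subst h'
  · exact Or.inl rfl
  · exact Or.inr (Or.inr (Or.inl rfl))

theorem pv_stepIn_snoc_nbr {g : List (List Int)} {m n : Int} {P : List (Int × Int)}
    {c q : Int × Int} (hcone : PVOne g m n c) (h : PVNbrIn g m n P c q) :
    PVStepIn g m n (P ++ [c]) c q :=
  ⟨⟨hcone, h.2.1, pv_nbrIn_mem_nbrs h⟩,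
    List.mem_append_right _ (List.mem_singleton_self c),
    List.mem_append_left _ h.2.2⟩

theorem pv_nbrIn_rmlt {c q : Int × Int}
    (h : (q = pvUpC c ∨ q = pvLfC c)) : pvRmlt q c := by
  rcases h with h' | h' <;> subst h'
  · exact Or.inl (show c.1 - 1 < c.1 by omega)
  · exact Or.inr ⟨rfl, show c.2 - 1 < c.2 by omega⟩

-- a step inside the extended prefix is either an old step or an edge at the new cell
theorem pvStepIn_snoc {g : List (List Int)} {m n : Int} {P rest : List (Int × Int)}
    {c : Int × Int} (hsplit : pvCells m n = P ++ c :: rest) {x y : Int × Int}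
    (h : PVStepIn g m n (P ++ [c]) x y) :
    PVStepIn g m n P x y ∨
    (x = c ∧ PVNbrIn g m n P c y ∧ PVOne g m n c) ∨
    (y = c ∧ PVNbrIn g m n P c x ∧ PVOne g m n c) := by
  obtain ⟨hprefix, hcP, hcin⟩ := pv_prefix_char hsplit
  obtain ⟨hstep, hxm, hym⟩ := h
  rw [List.mem_append, List.mem_singleton] at hxm hym
  have hnbrP : ∀ q, q ∈ pvNbrs m n c.1 c.2 → q ∈ P → (q = pvUpC c ∨ q = pvLfC c) := by
    intro q hq hqP
    have hqin : PVInR m n q := (mem_pvNbrs.mp hq).2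
    have hlt : pvRmlt q c := (hprefix q hqin).mp hqP
    rcases (mem_pvNbrs.mp hq).1 with h' | h' | h' | h'
    · exact Or.inl (by rw [h']; rfl)
    · exfalso
      rw [h'] at hlt
      exact pvRmlt_asymm (Or.inl (show c.1 < c.1 + 1 by omega)) hlt
    · exact Or.inr (by rw [h']; rfl)
    · exfalso
      rw [h'] at hlt
      exact pvRmlt_asymm (show pvRmlt c (c.1, c.2 + 1) from
        Or.inr ⟨rfl, show c.2 < c.2 + 1 by omega⟩) hlt
  rcases hxm with hxP | hxc
  · rcases hym with hyP | hyc
    · exact Or.inl ⟨hstep, hxP, hyP⟩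
    · have hxnbr : x ∈ pvNbrs m n c.1 c.2 := by
        rw [← hyc]
        exact mem_pvNbrs_symm hstep.1.1 hstep.2.2
      exact Or.inr (Or.inr ⟨hyc, ⟨hnbrP x hxnbr hxP, hstep.1, hxP⟩, hyc ▸ hstep.2.1⟩)
  · rcases hym with hyP | hyc
    · have hynbr : y ∈ pvNbrs m n c.1 c.2 := by
        rw [← hxc]
        exact hstep.2.2
      exact Or.inr (Or.inl ⟨hxc, ⟨hnbrP y hynbr hyP, hstep.2.1, hyP⟩, hxc ▸ hstep.1⟩)
    · exfalso
      have := pv_nbr_ne hstep.2.2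
      rw [hxc, hyc] at *
      exact this rfl

-- decomposing a path in the extended prefix
theorem pv_reachIn_snoc_decomp {g : List (List Int)} {m n : Int} {P rest : List (Int × Int)}
    {c : Int × Int} (hsplit : pvCells m n = P ++ c :: rest) {x y : Int × Int}
    (h : PVReachIn g m n (P ++ [c]) x y) :
    (x = c ∧ (y = c ∨ ∃ q, PVNbrIn g m n P c q ∧ PVReachIn g m n P q y)) ∨
    (x ≠ c ∧ (PVReachIn g m n P x y ∨
      (y = c ∧ ∃ q, PVNbrIn g m n P c q ∧ PVReachIn g m n P x q) ∨
      (∃ q q', PVNbrIn g m n P c q ∧ PVNbrIn g m n P c q' ∧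
        PVReachIn g m n P x q ∧ PVReachIn g m n P q' y))) := by
  have hcP : c ∉ P := (pv_prefix_char hsplit).2.1
  have hPc : ∀ a, PVReachIn g m n P a c → a = c := by
    intro a ha
    by_contra hne
    exact hcP (pvReachIn_mem ha hne)
  induction h with
  | refl =>
    by_cases hx : x = c
    · exact Or.inl ⟨hx, Or.inl hx⟩
    · exact Or.inr ⟨hx, Or.inl Relation.ReflTransGen.refl⟩
  | tail hr hs ih =>
    rename_i b q
    rcases pvStepIn_snoc hsplit hs with hPs | ⟨hbc, hqnbr, _⟩ | ⟨hqc, hbnbr, _⟩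
    · -- an old step b → q, both in P (so b ≠ c, q ≠ c)
      have hbP : b ∈ P := hPs.2.1
      have hbnc : b ≠ c := fun h' => hcP (h' ▸ hbP)
      have hqnc : q ≠ c := fun h' => hcP (h' ▸ hPs.2.2)
      rcases ih with ⟨hxc, hrest⟩ | ⟨hxnc, hrest⟩
      · rcases hrest with h' | ⟨q0, hq0, hq0r⟩
        · exact absurd h' hbnc
        · exact Or.inl ⟨hxc, Or.inr ⟨q0, hq0, hq0r.tail hPs⟩⟩
      · rcases hrest with h' | ⟨hbc', _⟩ | ⟨q0, q0', h1, h2, h3, h4⟩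
        · exact Or.inr ⟨hxnc, Or.inl (h'.tail hPs)⟩
        · exact absurd hbc' hbnc
        · exact Or.inr ⟨hxnc, Or.inr (Or.inr ⟨q0, q0', h1, h2, h3, h4.tail hPs⟩)⟩
    · -- the step c → q with q a present neighbour
      subst hbc
      rcases ih with ⟨hxc, _⟩ | ⟨hxnc, hrest⟩
      · exact Or.inl ⟨hxc, Or.inr ⟨q, hqnbr, Relation.ReflTransGen.refl⟩⟩
      · rcases hrest with h' | ⟨_, q0, hq0, hq0r⟩ | ⟨q0, q0', h1, h2, h3, _⟩
        · exact absurd (hPc x h') hxnc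
        · exact Or.inr ⟨hxnc, Or.inr (Or.inr
            ⟨q0, q, hq0, hqnbr, hq0r, Relation.ReflTransGen.refl⟩)⟩
        · exact Or.inr ⟨hxnc, Or.inr (Or.inr
            ⟨q0, q, h1, hqnbr, h3, Relation.ReflTransGen.refl⟩)⟩
    · -- the step b → c with b a present neighbour
      subst hqc
      rcases ih with ⟨hxc, _⟩ | ⟨hxnc, hrest⟩
      · exact Or.inl ⟨hxc, Or.inl rfl⟩
      · rcases hrest with h' | ⟨hbc', _⟩ | ⟨q0, q0', h1, h2, h3, h4⟩
        · exact Or.inr ⟨hxnc, Or.inr (Or.inl ⟨rfl, b, hbnbr, h'⟩)⟩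
        · exact absurd hbc' (fun hb => hcP (hb ▸ hbnbr.2.2))
        · exact Or.inr ⟨hxnc, Or.inr (Or.inl ⟨rfl, q0, h1, h3⟩)⟩

-- inserting the new cell when every present neighbour already carries label L ------------------

theorem pvInvB_insert {g : List (List Int)} {m n : Int} {P rest : List (Int × Int)}
    {c : Int × Int} (hsplit : pvCells m n = P ++ c :: rest)
    {comp : PySem.Dict (Int × Int) Int} {nxt : Int} (hinv : PVInvB g m n P comp nxt)
    (hcone : PVOne g m n c) (L : Int) (rstar : Int × Int)
    (hall : ∀ q, PVNbrIn g m n P c q → comp.get? q = some L)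
    (hr1 : rstar ∈ P ++ [c]) (hr2 : PVOne g m n rstar)
    (hr3 : pvCreatorB g m n rstar = true) (hr4 : L = pvLab g m n rstar)
    (hr5 : PVReachIn g m n (P ++ [c]) rstar c)
    (hr6 : ∀ d, (d = c ∨ ∃ q, PVNbrIn g m n P c q ∧ PVReachIn g m n P q d) → pvRmle rstar d)
    (nxt' : Int) (hnxt : nxt' = (((P ++ [c]).filter (pvCreatorB g m n)).length : Int)) :
    PVInvB g m n (P ++ [c]) (comp.insert c L) nxt' := by
  obtain ⟨hk, hkeys, hlab, _⟩ := hinv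
  have hcP : c ∉ P := (pv_prefix_char hsplit).2.1
  refine ⟨PySem.Dict.nodup_keys_insert _ _ _ hk, ?_, ?_, hnxt⟩
  · intro x
    rw [PySem.Dict.get?_insert]
    by_cases hx : x = c
    · subst hx
      simp [hcone]
    · rw [if_neg hx, hkeys x, List.mem_append, List.mem_singleton]
      constructor
      · rintro ⟨h1, h2⟩; exact ⟨Or.inl h1, h2⟩
      · rintro ⟨h1 | h1, h2⟩
        · exact ⟨h1, h2⟩
        · exact absurd h1 hx
  · intro x t hx
    rw [PySem.Dict.get?_insert] at hx
    by_cases hxc : x = c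
    · rw [if_pos hxc] at hx
      have ht : t = L := by cases hx; rfl
      subst hxc
      refine ⟨rstar, hr1, hr2, hr5, ?_, hr3, ht.trans hr4⟩
      intro d hd
      rcases pv_reachIn_snoc_decomp hsplit hd with ⟨_, h'⟩ | ⟨hne, _⟩
      · rcases h' with h' | ⟨q, hq, hqr⟩
        · exact hr6 d (Or.inl h')
        · exact hr6 d (Or.inr ⟨q, hq, hqr⟩)
      · exact absurd rfl hne
    · rw [if_neg hxc] at hx
      obtain ⟨rx, hrx1, hrx2, hrx3, hrx4, hrx5, hrx6⟩ := hlab x t hx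
      refine ⟨rx, List.mem_append_left _ hrx1, hrx2,
        pvReachIn_mono (fun a ha => List.mem_append_left _ ha) hrx3, ?_, hrx5, hrx6⟩
      intro d hd
      rcases pv_reachIn_snoc_decomp hsplit hd with ⟨hxc', _⟩ | ⟨_, hrest⟩
      · exact absurd hxc' hxc
      rcases hrest with h' | ⟨hdc, q, hq, hqr⟩ | ⟨q, q', hq, hq', hqr, hq'r⟩
      · exact hrx4 d h'
      · -- x is connected in P to a present neighbour, so its label is L and its root is rstar
        have hlx : comp.get? q = some t := pvInvB_class_label ⟨hk, hkeys, hlab, rfl⟩ hx hqr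
        have htL : t = L := by
          have := hall q hq
          rw [hlx] at this
          cases this; rfl
        have hrxstar : rx = rstar :=
          pvLab_inj hrx5 hrx2.1 hr3 hr2.1 (by rw [← hrx6, ← hr4, ← htL])
        rw [hrxstar, hdc]
        exact hr6 c (Or.inl rfl)
      · have hlx : comp.get? q = some t := pvInvB_class_label ⟨hk, hkeys, hlab, rfl⟩ hx hqr
        have htL : t = L := by
          have := hall q hq
          rw [hlx] at this
          cases this; rfl
        have hrxstar : rx = rstar :=
          pvLab_inj hrx5 hrx2.1 hr3 hr2.1 (by rw [← hrx6, ← hr4, ← htL])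
        rw [hrxstar]
        exact hr6 d (Or.inr ⟨q', hq', hq'r⟩)

theorem pvRmlt_rmle_trans {a b c : Int × Int} (h1 : pvRmlt a b) (h2 : pvRmle b c) :
    pvRmlt a c := by
  rcases h2 with h2 | h2
  · exact pvRmlt_trans h1 h2
  · exact h2 ▸ h1

theorem pv_two_nbrs {c qk qd q : Int × Int} (hk : qk = pvUpC c ∨ qk = pvLfC c)
    (hd : qd = pvUpC c ∨ qd = pvLfC c) (hne : qk ≠ qd)
    (hq : q = pvUpC c ∨ q = pvLfC c) : q = qk ∨ q = qd := by
  rcases hk with h1 | h1 <;> rcases hd with h2 | h2 <;> rcases hq with h3 | h3 <;>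
    first
    | exact absurd (h1.trans h2.symm) hne
    | exact Or.inl (h3.trans h1.symm)
    | exact Or.inr (h3.trans h2.symm)

-- the merge branch: relabel the larger label to the smaller, then insert the new cell ----------

theorem pvInvB_merge_aux {g : List (List Int)} {m n : Int} {P rest : List (Int × Int)}
    {c : Int × Int} (hsplit : pvCells m n = P ++ c :: rest)
    {comp : PySem.Dict (Int × Int) Int} {nxt : Int} (hinv : PVInvB g m n P comp nxt)
    (hcone : PVOne g m n c) (keep drop : Int) (qk qd : Int × Int)
    (hqk : PVNbrIn g m n P c qk) (hqd : PVNbrIn g m n P c qd)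
    (hgk : comp.get? qk = some keep) (hgd : comp.get? qd = some drop)
    (hkd : keep ≠ drop) (hlt : keep < drop)
    (hnxt : nxt = (((P ++ [c]).filter (pvCreatorB g m n)).length : Int)) :
    PVInvB g m n (P ++ [c])
      ((comp.items.foldl (fun d cl => if cl.2 == drop then d.insert cl.1 keep else d)
          comp).insert c keep) nxt := by
  obtain ⟨hk, hkeys, hlab, hn4⟩ := hinv
  have hinv' : PVInvB g m n P comp nxt := ⟨hk, hkeys, hlab, hn4⟩
  have hcP : c ∉ P := (pv_prefix_char hsplit).2.1
  have hqknd : qk ≠ qd := by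
    intro h
    rw [h, hgd] at hgk
    exact hkd (Option.some.inj hgk).symm
  -- roots of the two merged components
  obtain ⟨rk, hrk1, hrk2, hrk3, hrk4, hrk5, hrk6⟩ := hlab qk keep hgk
  obtain ⟨rd, hrd1, hrd2, hrd3, hrd4, hrd5, hrd6⟩ := hlab qd drop hgd
  have hrmlt : pvRmlt rk rd := by
    rw [← pvLab_lt_iff hrk5 hrk2.1 hrd5 hrd2.1, ← hrk6, ← hrd6]
    exact hlt
  -- the rewritten dict, described by lookups
  have hget : ∀ x, ((comp.items.foldl
      (fun d cl => if cl.2 == drop then d.insert cl.1 keep else d) comp).insert c keep).get? x =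
      if x = c then some keep
      else (comp.get? x).map (fun t => if t = drop then keep else t) := by
    intro x
    rw [PySem.Dict.get?_insert]
    by_cases hx : x = c
    · rw [if_pos hx, if_pos hx]
    · rw [if_neg hx, if_neg hx, pvRelabel_get? comp hk]
  have hstep_ck : PVStepIn g m n (P ++ [c]) c qk := pv_stepIn_snoc_nbr hcone hqk
  have hstep_cd : PVStepIn g m n (P ++ [c]) c qd := pv_stepIn_snoc_nbr hcone hqd
  have hmono : ∀ {a b : Int × Int}, PVReachIn g m n P a b → PVReachIn g m n (P ++ [c]) a b :=
    fun h => pvReachIn_mono (fun a ha => List.mem_append_left _ ha) h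
  have hreach_rk_c : PVReachIn g m n (P ++ [c]) rk c :=
    Relation.ReflTransGen.tail (hmono hrk3) (pvStepIn_symm hstep_ck)
  have hrkP' : rk ∈ P ++ [c] := List.mem_append_left _ hrk1
  have hrk_rmle_c : pvRmle rk c :=
    Or.inl ((((pv_prefix_char hsplit).1) rk hrk2.1).mp hrk1)
  -- the kept root bounds everything reachable from c in the extended prefix
  have hmin_c : ∀ d, (d = c ∨ ∃ q, PVNbrIn g m n P c q ∧ PVReachIn g m n P q d) →
      pvRmle rk d := by
    rintro d (hd | ⟨q, hq, hqr⟩)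
    · exact hd ▸ hrk_rmle_c
    · rcases pv_two_nbrs hqk.1 hqd.1 hqknd hq.1 with hqq | hqq
      · exact hrk4 d (hqq ▸ hqr)
      · exact Or.inl (pvRmlt_rmle_trans hrmlt (hrd4 d (hqq ▸ hqr)))
  refine ⟨?_, ?_, ?_, hnxt⟩
  · exact PySem.Dict.nodup_keys_insert _ _ _ (by rw [pvRelabel_keys]; exact hk)
  · intro x
    rw [hget x]
    by_cases hx : x = c
    · subst hx
      simp [hcone]
    · rw [if_neg hx]
      rw [show ((comp.get? x).map (fun t => if t = drop then keep else t)).isSome =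
        (comp.get? x).isSome from by cases comp.get? x <;> rfl]
      rw [hkeys x, List.mem_append, List.mem_singleton]
      constructor
      · rintro ⟨h1, h2⟩; exact ⟨Or.inl h1, h2⟩
      · rintro ⟨h1 | h1, h2⟩
        · exact ⟨h1, h2⟩
        · exact absurd h1 hx
  · intro x t hx
    rw [hget x] at hx
    by_cases hxc : x = c
    · rw [if_pos hxc] at hx
      have ht : t = keep := (Option.some.inj hx).symm
      subst hxc
      refine ⟨rk, hrkP', hrk2, hreach_rk_c, ?_, hrk5, ht.trans hrk6⟩
      intro d hd
      rcases pv_reachIn_snoc_decomp hsplit hd with ⟨_, h'⟩ | ⟨hne, _⟩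
      · rcases h' with h' | ⟨q, hq, hqr⟩
        · exact hmin_c d (Or.inl h')
        · exact hmin_c d (Or.inr ⟨q, hq, hqr⟩)
      · exact absurd rfl hne
    · rw [if_neg hxc] at hx
      cases hg0 : comp.get? x with
      | none => rw [hg0] at hx; cases hx
      | some t0 =>
        rw [hg0, Option.map_some] at hx
        have ht : t = if t0 = drop then keep else t0 := (Option.some.inj hx).symm
        obtain ⟨rx, hrx1, hrx2, hrx3, hrx4, hrx5, hrx6⟩ := hlab x t0 hg0
        by_cases hkdcase : t0 = keep ∨ t0 = drop
        · -- x lies in one of the two merged components: its new root is rk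
          have htkeep : t = keep := by
            rcases hkdcase with h' | h' <;> subst h' <;> simp [ht, hkd]
          have hconn : PVReachIn g m n P x qk ∨ PVReachIn g m n P x qd := by
            rcases hkdcase with h' | h'
            · exact Or.inl (pvInvB_label_class hinv' (h' ▸ hg0) hgk)
            · exact Or.inr (pvInvB_label_class hinv' (h' ▸ hg0) hgd)
          have hreach_c_x : PVReachIn g m n (P ++ [c]) c x := by
            rcases hconn with h' | h'
            · exact Relation.ReflTransGen.head hstep_ck (hmono (pvReachIn_symm h'))
            · exact Relation.ReflTransGen.head hstep_cd (hmono (pvReachIn_symm h'))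
          refine ⟨rk, hrkP', hrk2, Relation.ReflTransGen.trans hreach_rk_c hreach_c_x,
            ?_, hrk5, htkeep.trans hrk6⟩
          intro d hd
          have hcd : PVReachIn g m n (P ++ [c]) c d :=
            Relation.ReflTransGen.trans hreach_c_x hd
          rcases pv_reachIn_snoc_decomp hsplit hcd with ⟨_, h'⟩ | ⟨hne, _⟩
          · rcases h' with h' | ⟨q, hq, hqr⟩
            · exact hmin_c d (Or.inl h')
            · exact hmin_c d (Or.inr ⟨q, hq, hqr⟩)
          · exact absurd rfl hne
        · -- x is in an untouched component: nothing changes for it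
          have hnk : t0 ≠ keep := fun h' => hkdcase (Or.inl h')
          have hnd : t0 ≠ drop := fun h' => hkdcase (Or.inr h')
          have ht0 : t = t0 := by rw [ht, if_neg hnd]
          refine ⟨rx, List.mem_append_left _ hrx1, hrx2, hmono hrx3, ?_, hrx5,
            ht0.trans hrx6⟩
          intro d hd
          rcases pv_reachIn_snoc_decomp hsplit hd with ⟨hxc', _⟩ | ⟨_, hrest⟩
          · exact absurd hxc' hxc
          rcases hrest with h' | ⟨_, q, hq, hqr⟩ | ⟨q, q', hq, hq', hqr, _⟩
          · exact hrx4 d h'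
          · exfalso
            have hlx : comp.get? q = some t0 := pvInvB_class_label hinv' hg0 hqr
            rcases pv_two_nbrs hqk.1 hqd.1 hqknd hq.1 with hqq | hqq
            · rw [hqq, hgk] at hlx
              exact hnk (Option.some.inj hlx).symm
            · rw [hqq, hgd] at hlx
              exact hnd (Option.some.inj hlx).symm
          · exfalso
            have hlx : comp.get? q = some t0 := pvInvB_class_label hinv' hg0 hqr
            rcases pv_two_nbrs hqk.1 hqd.1 hqknd hq.1 with hqq | hqq
            · rw [hqq, hgk] at hlx
              exact hnk (Option.some.inj hlx).symm
            · rw [hqq, hgd] at hlx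
              exact hnd (Option.some.inj hlx).symm

theorem pvLab_self_eq {g : List (List Int)} {m n : Int} {P rest : List (Int × Int)}
    {c : Int × Int} (hsplit : pvCells m n = P ++ c :: rest) :
    pvLab g m n c = ((P.filter (pvCreatorB g m n)).length : Int) := by
  have hpw := pvCells_pairwise m n
  rw [hsplit] at hpw
  have hprefix := (pv_prefix_char hsplit).1
  have hcc : (pvCreatorB g m n c && pvRmltB c c) = false := by
    have : pvRmltB c c = false := by
      cases hb : pvRmltB c c
      · rfl
      · exact absurd (pvRmltB_iff.mp hb) (pvRmlt_irrefl c)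
    simp [this]
  have hrest : rest.filter (fun d => pvCreatorB g m n d && pvRmltB d c) = [] := by
    rw [List.filter_eq_nil_iff]
    intro d hd
    have hcd : pvRmlt c d := (List.pairwise_cons.mp (List.pairwise_append.mp hpw).2.1).1 d hd
    intro hb
    simp only [Bool.and_eq_true] at hb
    exact pvRmlt_asymm hcd (pvRmltB_iff.mp hb.2)
  have hP : P.filter (fun d => pvCreatorB g m n d && pvRmltB d c) =
      P.filter (pvCreatorB g m n) := by
    refine List.filter_congr ?_
    intro d hd
    have hdin : PVInR m n d := mem_pvCells.mp (by rw [hsplit]; exact List.mem_append_left _ hd)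
    have h' : pvRmltB d c = true := pvRmltB_iff.mpr ((hprefix d hdin).mp hd)
    simp [h']
  unfold pvLab
  rw [hsplit, List.filter_append, List.filter_cons_of_neg (by simp [hcc]), hrest, hP]
  simp

theorem pvInvB_step {g : List (List Int)} {m n : Int} {P rest : List (Int × Int)}
    {c : Int × Int} (hsplit : pvCells m n = P ++ c :: rest)
    {comp : PySem.Dict (Int × Int) Int} {nxt : Int} (hinv : PVInvB g m n P comp nxt) :
    PVInvB g m n (P ++ [c]) (pvStepLab g (comp, nxt) c).1 (pvStepLab g (comp, nxt) c).2 := by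
  obtain ⟨hprefix, hcP, hcin⟩ := pv_prefix_char hsplit
  by_cases hval : pvVal g c.1 c.2 = 1
  case neg =>
    have hguard : (pvVal g c.1 c.2 == 1) = false := by simp [hval]
    have hstep : pvStepLab g (comp, nxt) c = (comp, nxt) := by
      unfold pvStepLab
      rw [hguard]
      simp
    rw [hstep]
    obtain ⟨hk, hkeys, hlab, hn4⟩ := hinv
    have hnotone : ¬ PVOne g m n c := fun h => hval h.2
    have hstep_iff : ∀ x y, PVStepIn g m n (P ++ [c]) x y ↔ PVStepIn g m n P x y := by
      intro x y
      constructor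
      · intro h
        rcases pvStepIn_snoc hsplit h with h' | ⟨_, _, h1⟩ | ⟨_, _, h1⟩
        · exact h'
        all_goals exact absurd h1 hnotone
      · intro h
        exact ⟨h.1, List.mem_append_left _ h.2.1, List.mem_append_left _ h.2.2⟩
    have hreach_iff : ∀ x y, PVReachIn g m n (P ++ [c]) x y ↔ PVReachIn g m n P x y := by
      intro x y
      constructor
      · exact fun h => Relation.ReflTransGen.mono (fun a b hab => (hstep_iff a b).mp hab) h
      · exact fun h => Relation.ReflTransGen.mono (fun a b hab => (hstep_iff a b).mpr hab) h
    have hcreator : pvCreatorB g m n c = false := by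
      have h' : pvOneB g m n c = false := by
        cases hb : pvOneB g m n c
        · rfl
        · exact absurd (pvOneB_iff.mp hb) hnotone
      simp [pvCreatorB, h']
    refine ⟨hk, ?_, ?_, ?_⟩
    · intro x
      rw [hkeys x, List.mem_append, List.mem_singleton]
      constructor
      · rintro ⟨h1, h2⟩; exact ⟨Or.inl h1, h2⟩
      · rintro ⟨h1 | h1, h2⟩
        · exact ⟨h1, h2⟩
        · exact absurd (h1 ▸ h2) hnotone
    · intro x t hx
      obtain ⟨r, h1, h2, h3, h4, h5, h6⟩ := hlab x t hx
      exact ⟨r, List.mem_append_left _ h1, h2,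
        pvReachIn_mono (fun a ha => List.mem_append_left _ ha) h3,
        fun d hd => h4 d ((hreach_iff x d).mp hd), h5, h6⟩
    · rw [hn4, List.filter_append]
      simp [hcreator]
  case pos =>
    have hcone : PVOne g m n c := ⟨hcin, hval⟩
    have hguard : (pvVal g c.1 c.2 == 1) = true := by simp [hval]
    have hnbrkey : ∀ q, (q = pvUpC c ∨ q = pvLfC c) →
        ((comp.get? q).isSome = true ↔ PVOne g m n q) := by
      intro q hq
      rw [hinv.2.1 q]
      constructor
      · exact fun h => h.2
      · intro h
        exact ⟨(hprefix q h.1).mpr (pv_nbrIn_rmlt hq), h⟩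
    have hnone_iff : ∀ q, (q = pvUpC c ∨ q = pvLfC c) →
        (comp.get? q = none → ¬ PVOne g m n q) := by
      intro q hq hqn hone
      have := (hnbrkey q hq).mpr hone
      rw [hqn] at this
      cases this
    have hsome_one : ∀ q, (q = pvUpC c ∨ q = pvLfC c) → ∀ v, comp.get? q = some v →
        PVOne g m n q ∧ q ∈ P := by
      intro q hq v hv
      have h1 : (comp.get? q).isSome = true := by rw [hv]; rfl
      have h2 := (hnbrkey q hq).mp h1
      exact ⟨h2, ((hinv.2.1 q).mp h1).1⟩
    have hcnt : ∀ b : Bool, pvCreatorB g m n c = b →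
        (((P ++ [c]).filter (pvCreatorB g m n)).length : Int) =
          nxt + (if b then 1 else 0) := by
      intro b hb
      rw [hinv.2.2.2, List.filter_append]
      cases b
      · simp [hb]
      · simp [hb]
    cases hu : comp.get? (c.1 - 1, c.2) with
    | none =>
      have hu' : comp.get? (pvUpC c) = none := hu
      cases hl : comp.get? (c.1, c.2 - 1) with
      | none =>
        have hl' : comp.get? (pvLfC c) = none := hl
        have hstep : pvStepLab g (comp, nxt) c = (comp.insert c nxt, nxt + 1) := by
          unfold pvStepLab
          rw [hguard]
          simp only [if_true]
          rw [hu, hl]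
        rw [hstep]
        have hupnone : ¬ PVOne g m n (pvUpC c) := hnone_iff _ (Or.inl rfl) hu'
        have hlfnone : ¬ PVOne g m n (pvLfC c) := hnone_iff _ (Or.inr rfl) hl'
        have hcreator : pvCreatorB g m n c = true := by
          have h1 : pvOneB g m n c = true := pvOneB_iff.mpr hcone
          have h2 : pvOneB g m n (pvUpC c) = false := by
            cases hb : pvOneB g m n (pvUpC c)
            · rfl
            · exact absurd (pvOneB_iff.mp hb) hupnone
          have h3 : pvOneB g m n (pvLfC c) = false := by
            cases hb : pvOneB g m n (pvLfC c)
            · rfl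
            · exact absurd (pvOneB_iff.mp hb) hlfnone
          simp [pvCreatorB, h1, h2, h3]
        have hnonbr : ∀ q, ¬ PVNbrIn g m n P c q := by
          rintro q ⟨hq, hone, _⟩
          rcases hq with h' | h'
          · exact hupnone (h' ▸ hone)
          · exact hlfnone (h' ▸ hone)
        refine pvInvB_insert hsplit hinv hcone nxt c
          (fun q hq => absurd hq (hnonbr q))
          (List.mem_append_right _ (List.mem_singleton_self c)) hcone hcreator
          (hinv.2.2.2.trans (pvLab_self_eq hsplit).symm)
          Relation.ReflTransGen.refl ?_ (nxt + 1) ?_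
        · rintro d (hd | ⟨q, hq, _⟩)
          · exact hd ▸ pvRmle_refl c
          · exact absurd hq (hnonbr q)
        · rw [hcnt true hcreator]
          simp
      | some l =>
        have hl' : comp.get? (pvLfC c) = some l := hl
        have hstep : pvStepLab g (comp, nxt) c = (comp.insert c l, nxt) := by
          unfold pvStepLab
          rw [hguard]
          simp only [if_true]
          rw [hu, hl]
        rw [hstep]
        have hupnone : ¬ PVOne g m n (pvUpC c) := hnone_iff _ (Or.inl rfl) hu
        obtain ⟨hlfone, hlfP⟩ := hsome_one _ (Or.inr rfl) l hl'
        obtain ⟨rl, hrl1, hrl2, hrl3, hrl4, hrl5, hrl6⟩ := hinv.2.2.1 (pvLfC c) l hl'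
        have hlnbr : PVNbrIn g m n P c (pvLfC c) := ⟨Or.inr rfl, hlfone, hlfP⟩
        have hcreator : pvCreatorB g m n c = false := by
          simp [pvCreatorB, pvOneB_iff.mpr hlfone]
        refine pvInvB_insert hsplit hinv hcone l rl ?_
          (List.mem_append_left _ hrl1) hrl2 hrl5 hrl6 ?_ ?_ nxt ?_
        · rintro q ⟨hq, hone, _⟩
          rcases hq with h' | h'
          · exact absurd (h' ▸ hone) hupnone
          · exact h' ▸ hl'
        · exact Relation.ReflTransGen.tail
            (pvReachIn_mono (fun a ha => List.mem_append_left _ ha) hrl3)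
            (pvStepIn_symm (pv_stepIn_snoc_nbr hcone hlnbr))
        · rintro d (hd | ⟨q, ⟨hq, hone, _⟩, hqr⟩)
          · exact hd ▸ Or.inl ((hprefix rl hrl2.1).mp hrl1)
          · rcases hq with h' | h'
            · exact absurd (h' ▸ hone) hupnone
            · exact hrl4 d (h' ▸ hqr)
        · rw [hcnt false hcreator]
          simp
    | some u =>
      have hu' : comp.get? (pvUpC c) = some u := hu
      obtain ⟨hupone, hupP⟩ := hsome_one _ (Or.inl rfl) u hu'
      obtain ⟨ru, hru1, hru2, hru3, hru4, hru5, hru6⟩ := hinv.2.2.1 (pvUpC c) u hu'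
      have hunbr : PVNbrIn g m n P c (pvUpC c) := ⟨Or.inl rfl, hupone, hupP⟩
      have hcreator : pvCreatorB g m n c = false := by
        simp [pvCreatorB, pvOneB_iff.mpr hupone]
      have hreach_ru_c : PVReachIn g m n (P ++ [c]) ru c :=
        Relation.ReflTransGen.tail
          (pvReachIn_mono (fun a ha => List.mem_append_left _ ha) hru3)
          (pvStepIn_symm (pv_stepIn_snoc_nbr hcone hunbr))
      cases hl : comp.get? (c.1, c.2 - 1) with
      | none =>
        have hstep : pvStepLab g (comp, nxt) c = (comp.insert c u, nxt) := by
          unfold pvStepLab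
          rw [hguard]
          simp only [if_true]
          rw [hu, hl]
        rw [hstep]
        have hlfnone : ¬ PVOne g m n (pvLfC c) := hnone_iff _ (Or.inr rfl) hl
        refine pvInvB_insert hsplit hinv hcone u ru ?_
          (List.mem_append_left _ hru1) hru2 hru5 hru6 hreach_ru_c ?_ nxt ?_
        · rintro q ⟨hq, hone, _⟩
          rcases hq with h' | h'
          · exact h' ▸ hu'
          · exact absurd (h' ▸ hone) hlfnone
        · rintro d (hd | ⟨q, ⟨hq, hone, _⟩, hqr⟩)
          · exact hd ▸ Or.inl ((hprefix ru hru2.1).mp hru1)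
          · rcases hq with h' | h'
            · exact hru4 d (h' ▸ hqr)
            · exact absurd (h' ▸ hone) hlfnone
        · rw [hcnt false hcreator]
          simp
      | some l =>
        have hl' : comp.get? (pvLfC c) = some l := hl
        obtain ⟨hlfone, hlfP⟩ := hsome_one _ (Or.inr rfl) l hl'
        obtain ⟨rl, hrl1, hrl2, hrl3, hrl4, hrl5, hrl6⟩ := hinv.2.2.1 (pvLfC c) l hl'
        have hlnbr : PVNbrIn g m n P c (pvLfC c) := ⟨Or.inr rfl, hlfone, hlfP⟩
        have hnxtP : nxt = (((P ++ [c]).filter (pvCreatorB g m n)).length : Int) := by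
          rw [hcnt false hcreator]
          simp
        by_cases hul : u = l
        · have hbeq : (u == l) = true := by simp [hul]
          have hstep : pvStepLab g (comp, nxt) c = (comp.insert c u, nxt) := by
            unfold pvStepLab
            rw [hguard]
            simp only [if_true]
            rw [hu, hl]
            simp [hbeq]
          rw [hstep]
          have hrul : ru = rl :=
            pvLab_inj hru5 hru2.1 hrl5 hrl2.1 (by rw [← hru6, ← hrl6, hul])
          refine pvInvB_insert hsplit hinv hcone u ru ?_
            (List.mem_append_left _ hru1) hru2 hru5 hru6 hreach_ru_c ?_ nxt hnxtP
          · rintro q ⟨hq, hone, _⟩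
            rcases hq with h' | h'
            · exact h' ▸ hu'
            · rw [h', hl', hul]
          · rintro d (hd | ⟨q, ⟨hq, hone, _⟩, hqr⟩)
            · exact hd ▸ Or.inl ((hprefix ru hru2.1).mp hru1)
            · rcases hq with h' | h'
              · exact hru4 d (h' ▸ hqr)
              · exact hrul ▸ hrl4 d (h' ▸ hqr)
        · have hbeq : (u == l) = false := by simp [hul]
          have hstep : pvStepLab g (comp, nxt) c =
              ((comp.items.foldl
                (fun d cl => if cl.2 == max u l then d.insert cl.1 (min u l) else d)
                comp).insert c (min u l), nxt) := by
            unfold pvStepLab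
            rw [hguard]
            simp only [if_true]
            rw [hu, hl]
            simp [hbeq]
          rw [hstep]
          rcases lt_or_gt_of_ne hul with hlt | hlt
          · have hmin : min u l = u := min_eq_left hlt.le
            have hmax : max u l = l := max_eq_right hlt.le
            rw [hmin, hmax]
            exact pvInvB_merge_aux hsplit hinv hcone u l (pvUpC c) (pvLfC c)
              hunbr hlnbr hu' hl' hul hlt hnxtP
          · have hmin : min u l = l := min_eq_right hlt.le
            have hmax : max u l = u := max_eq_left hlt.le
            rw [hmin, hmax]
            exact pvInvB_merge_aux hsplit hinv hcone l u (pvLfC c) (pvUpC c)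
              hlnbr hunbr hl' hu' (Ne.symm hul) hlt hnxtP

theorem pvInvB_fold {g : List (List Int)} {m n : Int} :
    ∀ (rest P : List (Int × Int)) (comp : PySem.Dict (Int × Int) Int) (nxt : Int),
      pvCells m n = P ++ rest → PVInvB g m n P comp nxt →
      PVInvB g m n (P ++ rest) (rest.foldl (pvStepLab g) (comp, nxt)).1
        (rest.foldl (pvStepLab g) (comp, nxt)).2 := by
  intro rest
  induction rest with
  | nil => intro P comp nxt h hinv; simpa using hinv
  | cons c t ih =>
    intro P comp nxt h hinv
    have hstep := pvInvB_step h hinv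
    have hrw : P ++ c :: t = (P ++ [c]) ++ t := by simp
    rw [hrw, List.foldl_cons]
    have := ih (P ++ [c]) (pvStepLab g (comp, nxt) c).1 (pvStepLab g (comp, nxt) c).2
      (by rw [h]; simp) hstep
    simpa using this

theorem pvComp_final (g : List (List Int)) (m n : Int) :
    (pvScanLab g m n).keys.Nodup ∧
    (∀ c, ((pvScanLab g m n).get? c).isSome = true ↔ PVOne g m n c) ∧
    (∀ c l, (pvScanLab g m n).get? c = some l →
      ∃ r, PVRoot g m n r ∧ PVReach g m n r c ∧ l = pvLab g m n r) ∧
    (∀ r, PVRoot g m n r → (pvScanLab g m n).get? r = some (pvLab g m n r)) := by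
  have hinit : PVInvB g m n [] PySem.Dict.empty 0 := by
    refine ⟨PySem.Dict.nodup_keys_empty, ?_, ?_, by simp⟩
    · intro x
      rw [PySem.Dict.get?_empty]
      simp
    · intro x l hx
      rw [PySem.Dict.get?_empty] at hx
      cases hx
  have hfold := pvInvB_fold (pvCells m n) [] PySem.Dict.empty 0 (by simp) hinit
  rw [List.nil_append] at hfold
  obtain ⟨hk, hkeys, hlab, _⟩ := hfold
  rw [pvScanLab_eq]
  have hkeys' : ∀ c, (((pvCells m n).foldl (pvStepLab g)
      (PySem.Dict.empty, 0)).1.get? c).isSome = true ↔ PVOne g m n c := by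
    intro c
    rw [hkeys c]
    constructor
    · exact fun h => h.2
    · exact fun h => ⟨mem_pvCells.mpr h.1, h⟩
  have hlab' : ∀ c l, ((pvCells m n).foldl (pvStepLab g)
      (PySem.Dict.empty, 0)).1.get? c = some l →
      ∃ r, PVRoot g m n r ∧ PVReach g m n r c ∧ l = pvLab g m n r := by
    intro c l hc
    obtain ⟨r, _, hr2, hr3, hr4, _, hr6⟩ := hlab c l hc
    have hcone : PVOne g m n c := ((hkeys' c).mp (by rw [hc]; rfl))
    have hreach : PVReach g m n r c := pvReachIn_to_reach hr3
    refine ⟨r, ⟨hr2, ?_⟩, hreach, hr6⟩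
    intro d hd
    have hcd : PVReach g m n c d :=
      Relation.ReflTransGen.trans (pv_reach_symm hreach) hd
    exact hr4 d (pvReachIn_full hcone hcd)
  refine ⟨hk, hkeys', hlab', ?_⟩
  intro r hroot
  have hk2 : (((pvCells m n).foldl (pvStepLab g)
      (PySem.Dict.empty, 0)).1.get? r).isSome = true := (hkeys' r).mpr hroot.1
  obtain ⟨l, hl⟩ := Option.isSome_iff_exists.mp hk2
  obtain ⟨r', hr'1, hr'2, hr'3⟩ := hlab' r l hl
  have : r' = r := pvRoot_unique hr'1 hroot hr'2
  rw [hl, hr'3, this]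

theorem pv_foldl_concat_map {α β : Type} (h : α → β) :
    ∀ (l : List α) (acc : List β), l.foldl (fun a x => a ++ [h x]) acc = acc ++ l.map h := by
  intro l
  induction l with
  | nil => intro acc; simp
  | cons x t ih => intro acc; simp [ih]

-- the sorted distinct labels are exactly the labels of the roots, in row-major root order
theorem pvLabels_eq (g : List (List Int)) (m n : Int) (R : List (Int × Int))
    (hpw : R.Pairwise pvRmlt) (hmem : ∀ r, r ∈ R ↔ PVRoot g m n r) :
    PySem.List.sorted (PySem.Set.ofList (pvScanLab g m n).values) (fun x => x) false
      = R.map (pvLab g m n) := by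
  obtain ⟨hk, hkeys, hlab, hroot⟩ := pvComp_final g m n
  have hplt : (R.map (pvLab g m n)).Pairwise (· < ·) := by
    rw [List.pairwise_map]
    refine hpw.imp_of_mem ?_
    intro a b ha hb hab
    have hra := (hmem a).mp ha
    have hrb := (hmem b).mp hb
    exact pvLab_lt (pvRoot_creator hra) hra.1.1 hab
  have hndl : (R.map (pvLab g m n)).Nodup := hplt.imp (fun h => ne_of_lt h)
  have hmems : ∀ v, v ∈ R.map (pvLab g m n) ↔ v ∈ PySem.Set.ofList (pvScanLab g m n).values := by
    intro v
    rw [PySem.Set.mem_ofList, List.mem_map]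
    constructor
    · rintro ⟨r, hr, hv⟩
      have hrr := (hmem r).mp hr
      have hg := hroot r hrr
      have hit := PySem.Dict.mem_items_of_get?_eq_some _ hg
      rw [show (pvScanLab g m n).values = (pvScanLab g m n).items.map (fun p => p.2) from rfl]
      exact List.mem_map.mpr ⟨(r, pvLab g m n r), hit, hv⟩
    · intro hv
      rw [show (pvScanLab g m n).values = (pvScanLab g m n).items.map (fun p => p.2) from rfl]
        at hv
      obtain ⟨p, hp, hpv⟩ := List.mem_map.mp hv
      have hg : (pvScanLab g m n).get? p.1 = some p.2 :=
        PySem.Dict.get?_of_mem_items _ (by rw [show (p.1, p.2) = p from rfl]; exact hp) hk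
      obtain ⟨r, hr1, _, hr3⟩ := hlab p.1 p.2 hg
      exact ⟨r, (hmem r).mpr hr1, by rw [← hr3, hpv]⟩
  have hperm : (R.map (pvLab g m n)).Perm (PySem.Set.ofList (pvScanLab g m n).values) :=
    (List.perm_ext_iff_of_nodup hndl (PySem.Set.nodup_ofList _)).mpr hmems
  exact PySem.List.sorted_eq_of_perm_of_pairwise_lt _ _ _ hperm hplt

def PVGRel (g : List (List Int)) (m n : Int)
    (grp : List (Int × Int) × PySem.Set (Int × Int) × Int) (r : Int × Int) : Prop :=
  grp.1.Nodup ∧ (∀ p, p ∈ grp.1 ↔ PVReach g m n r p) ∧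
  grp.2.1.Nodup ∧ (∀ t, t ∈ grp.2.1 ↔ ∃ p, PVReach g m n r p ∧ PVZNbr g m n p t) ∧
  grp.2.2 = (grp.1.map (pvZC g m n)).sum

theorem pvGroupsB_cell (g : List (List Int)) (m n : Int) {r : Int × Int}
    (hr : PVRoot g m n r) :
    PVGRel g m n
      (((pvScanLab g m n).items.filter (fun cl => cl.2 == pvLab g m n r)).map
          (fun cl => cl.1),
        (pvMeasureB g m n (((pvScanLab g m n).items.filter
          (fun cl => cl.2 == pvLab g m n r)).map (fun cl => cl.1))).1,
        (pvMeasureB g m n (((pvScanLab g m n).items.filter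
          (fun cl => cl.2 == pvLab g m n r)).map (fun cl => cl.1))).2) r := by
  obtain ⟨hk, hkeys, hlab, hroot⟩ := pvComp_final g m n
  set cells := ((pvScanLab g m n).items.filter (fun cl => cl.2 == pvLab g m n r)).map
    (fun cl => cl.1) with hcellsdef
  have hcells : ∀ x, x ∈ cells ↔ PVReach g m n r x := by
    intro x
    rw [hcellsdef, List.mem_map]
    constructor
    · rintro ⟨cl, hcl, hcl1⟩
      have hcl2 : cl.2 = pvLab g m n r := by
        have := List.of_mem_filter hcl
        simpa using this
      have hclm : (x, pvLab g m n r) ∈ (pvScanLab g m n).items := by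
        rw [← hcl1, ← hcl2]
        exact List.mem_of_mem_filter hcl
      have hg : (pvScanLab g m n).get? x = some (pvLab g m n r) :=
        PySem.Dict.get?_of_mem_items _ hclm hk
      obtain ⟨r', hr'1, hr'2, hr'3⟩ := hlab x _ hg
      have : r' = r := pvLab_inj (pvRoot_creator hr'1) hr'1.1.1
        (pvRoot_creator hr) hr.1.1 hr'3.symm
      exact this ▸ hr'2
    · intro hreach
      have hxone : PVOne g m n x := pv_reach_one hr.1 hreach
      have hks : ((pvScanLab g m n).get? x).isSome = true := (hkeys x).mpr hxone
      obtain ⟨l, hl⟩ := Option.isSome_iff_exists.mp hks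
      obtain ⟨r', hr'1, hr'2, hr'3⟩ := hlab x l hl
      have heq : r' = r := pvRoot_unique hr'1 hr
        (Relation.ReflTransGen.trans hr'2 (pv_reach_symm hreach))
      refine ⟨(x, l), ?_, rfl⟩
      refine List.mem_filter.mpr ⟨PySem.Dict.mem_items_of_get?_eq_some _ hl, ?_⟩
      simp [hr'3, heq]
    -- nodup
  have hnd : cells.Nodup := by
    have hsub : List.Sublist ((((pvScanLab g m n).items.filter
        (fun cl => cl.2 == pvLab g m n r))).map (fun cl => cl.1))
        ((pvScanLab g m n).items.map (fun cl => cl.1)) :=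
      List.Sublist.map _ List.filter_sublist
    have hknd : ((pvScanLab g m n).items.map (fun cl => cl.1)).Nodup := hk
    exact hknd.sublist hsub
  obtain ⟨hm1, hm2, hm3⟩ := pvMeasureB_spec g m n cells
  refine ⟨hnd, hcells, hm2, ?_, hm3⟩
  intro t
  rw [hm1 t]
  constructor
  · rintro ⟨p, hp, hz⟩; exact ⟨p, (hcells p).mp hp, hz⟩
  · rintro ⟨p, hp, hz⟩; exact ⟨p, (hcells p).mpr hp, hz⟩

theorem pvGroupsB_char (g : List (List Int)) (m n : Int) (R : List (Int × Int))
    (hmem : ∀ r, r ∈ R ↔ PVRoot g m n r) :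
    List.Forall₂ (PVGRel g m n)
      (pvGroupsB g m n (pvScanLab g m n) (R.map (pvLab g m n))) R := by
  unfold pvGroupsB
  rw [pv_foldl_concat_map (fun lab =>
      ((((pvScanLab g m n)).items.filter (fun cl => cl.2 == lab)).map (fun cl => cl.1),
        (pvMeasureB g m n ((((pvScanLab g m n)).items.filter
          (fun cl => cl.2 == lab)).map (fun cl => cl.1))).1,
        (pvMeasureB g m n ((((pvScanLab g m n)).items.filter
          (fun cl => cl.2 == lab)).map (fun cl => cl.1))).2)),
    List.nil_append, List.map_map, List.forall₂_map_left_iff, List.forall₂_same]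
  intro r hr
  exact pvGroupsB_cell g m n ((hmem r).mp hr)

-- one day of A equals one day of B -------------------------------------------------------------

theorem pvDay_eq (g : List (List Int)) (m n : Int) (hm : 0 ≤ m) (hn : 0 ≤ n)
    (hs : PVGShape g m n) :
    pvDayA g m n = pvDayB g m n ∧
    (∀ g' w, pvDayA g m n = some (g', w) → PVGShape g' m n) := by
  obtain ⟨R, hRpw, hRmem, Freg, Ffr, Fw⟩ := pvScanA_char g m n hm hn
  have hG : List.Forall₂ (PVGRel g m n)
      (pvGroupsB g m n (pvScanLab g m n) (R.map (pvLab g m n))) R :=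
    pvGroupsB_char g m n R hRmem
  have hlabels : PySem.List.sorted (PySem.Set.ofList (pvScanLab g m n).values)
      (fun x => x) false = R.map (pvLab g m n) := pvLabels_eq g m n R hRpw hRmem
  set SA := pvScanA g m n with hSA
  set groups := pvGroupsB g m n (pvScanLab g m n) (R.map (pvLab g m n)) with hgroups
  have hLreg : SA.1.length = R.length := Freg.length_eq
  have hLfr : SA.2.1.length = R.length := Ffr.length_eq
  have hLw : SA.2.2.length = R.length := Fw.length_eq
  have hLg : groups.length = R.length := hG.length_eq
  have hroot : ∀ (j : Nat) (hj : j < R.length), PVRoot g m n R[j] :=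
    fun j hj => (hRmem _).mp (List.getElem_mem hj)
  by_cases hempR : R = []
  · -- no regions on either side
    have hregnil : SA.1 = [] := by
      rw [← List.length_eq_zero_iff, hLreg, hempR]; rfl
    have hA : pvDayA g m n = none := by
      rw [pvDayA, ← hSA]
      simp [hregnil]
    have hB : pvDayB g m n = none := by
      rw [pvDayB]
      simp only [hlabels, hempR, List.map_nil, List.isEmpty_nil, if_true]
    rw [hA, hB]
    exact ⟨rfl, fun g' w h => by cases h⟩
  · have hL1 : 1 ≤ R.length := by
      cases R
      · exact absurd rfl hempR
      · simp
    have hregne : SA.1.isEmpty = false := by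
      rw [List.isEmpty_eq_false_iff, ← List.length_pos_iff, hLreg]
      omega
    have hlabne : (R.map (pvLab g m n)).isEmpty = false := by
      rw [List.isEmpty_eq_false_iff, ← List.length_pos_iff, List.length_map]
      omega
    -- per-index relations at getD
    have hFr : ∀ (j : Nat) (hj : j < R.length),
        PVFrRel g m n (SA.2.1.getD j PySem.Set.empty) R[j] := by
      intro j hj
      rw [List.getD_eq_getElem _ _ (by omega : j < SA.2.1.length)]
      exact Ffr.get (by omega) hj
    have hGg : ∀ (j : Nat) (hj : j < R.length), PVGRel g m n (groups.getD j pvGroupD) R[j] := by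
      intro j hj
      rw [List.getD_eq_getElem _ _ (by omega : j < groups.length)]
      exact hG.get (by omega) hj
    have hReg : ∀ (j : Nat) (hj : j < R.length),
        PVRegRel g m n (SA.1.getD j []) R[j] := by
      intro j hj
      rw [List.getD_eq_getElem _ _ (by omega : j < SA.1.length)]
      exact Freg.get (by omega) hj
    -- the frontier sizes coincide index by index
    have hf : ∀ (j : Nat), j < R.length →
        PySem.Set.len (SA.2.1.getD j PySem.Set.empty) =
        PySem.Set.len ((groups.getD j pvGroupD)).2.1 := by
      intro j hj
      obtain ⟨ha1, ha2⟩ := hFr j hj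
      obtain ⟨_, _, hb1, hb2, _⟩ := hGg j hj
      rw [PySem.Set.len_eq, PySem.Set.len_eq]
      exact congrArg _ (pv_length_eq ha1 hb1 (fun t => by rw [ha2 t, hb2 t]))
    -- A's choice: first frontier of maximal size
    have hfne : SA.2.1 ≠ [] := by
      rw [← List.length_pos_iff, hLfr]
      omega
    obtain ⟨k, hkF, hmax, hstrict, hle⟩ :=
      pv_max?_first (fun s => PySem.Set.len s) SA.2.1 PySem.Set.empty hfne
    have hkR : k < R.length := by omega
    have hidx : pvIdxOf SA.2.1 (SA.2.1.getD k PySem.Set.empty) = (k : Int) := by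
      refine pvIdxOf_eq SA.2.1 k PySem.Set.empty (by omega) ?_ hstrict
      intro j hj
      exact (hFr j (by omega)).1
    -- B's choice: single-pass argmax over the same sizes
    obtain ⟨bk, hbk, hfold, hbstrict, hble⟩ := pvBest_aux groups (groups.length - 1)
      (by omega)
    have hrangeB : PySem.List.pyRange 1 (groups.length : Int) 1 =
        (List.range (groups.length - 1)).map (fun (j : Nat) => 1 + (j : Int)) := by
      have hcast : ((groups.length : Int) - 1).toNat = groups.length - 1 := by omega
      rw [PySem.List.pyRange_one, hcast]
    have hbfold : (PySem.List.pyRange 1 (groups.length : Int) 1).foldl (fun best k =>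
        if PySem.Set.len (PySem.List.pyGetD groups k pvGroupD).2.1 >
           PySem.Set.len (PySem.List.pyGetD groups best pvGroupD).2.1 then k else best) 0
        = (bk : Int) := by
      rw [hrangeB, List.foldl_map]
      exact hfold
    have hkbk : k = bk := by
      refine pv_firstmax_unique (fun j => PySem.Set.len ((groups.getD j pvGroupD)).2.1)
        R.length k bk hkR ?_ ?_ (by omega) ?_ ?_
      · intro j hj
        have h' := hstrict j hj
        rwa [hf j (by omega), hf k hkR] at h'
      · intro j hj
        have h' := hle j (by omega)
        rwa [hf j hj, hf k hkR] at h'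
      · intro j hj
        exact hbstrict j hj
      · intro j hj
        exact hble j (by omega)
    subst hkbk
    -- both sides produce `some`
    have hA : pvDayA g m n =
        some (pvUpdateA g SA.1 SA.2.1 (k : Int),
          PySem.List.pyGetD SA.2.2 (k : Int) 0) := by
      rw [pvDayA, ← hSA]
      simp only [hregne, Bool.false_eq_true, if_false, hmax, hidx]
    have hB : pvDayB g m n =
        some ((PySem.List.pyRange 0 m 1).map (fun i =>
            (PySem.List.pyRange 0 ((PySem.List.pyGetD g i []).length : Int) 1).map (fun j =>
              if PySem.Set.contains
                (PySem.Set.ofList (PySem.List.pyGetD groups (k : Int) pvGroupD).1) (i, j)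
              then -1
              else if PySem.Set.contains
                ((PySem.List.pyRange 0 (groups.length : Int) 1).foldl (fun sp kk =>
                  if kk ≠ (k : Int) then
                    PySem.Set.update sp (PySem.List.pyGetD groups kk pvGroupD).2.1
                  else sp) PySem.Set.empty) (i, j) then 1
              else pvVal g i j)),
          (PySem.List.pyGetD groups (k : Int) pvGroupD).2.2) := by
      rw [pvDayB]
      simp only [hlabels, hlabne, Bool.false_eq_true, if_false, ← hgroups, hbfold]
    -- B's spread set, characterized
    have hrange0 : PySem.List.pyRange 0 (groups.length : Int) 1 =
        (List.range groups.length).map (fun kk => ((kk : Nat) : Int)) :=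
      PySem.List.pyRange_zero_nat groups.length
    obtain ⟨hsp, _⟩ := pvSpread_aux groups (k : Int) groups.length
    have hspread : ∀ t, t ∈ ((PySem.List.pyRange 0 (groups.length : Int) 1).foldl (fun sp kk =>
        if kk ≠ (k : Int) then PySem.Set.update sp (PySem.List.pyGetD groups kk pvGroupD).2.1
        else sp) PySem.Set.empty) ↔
        ∃ kk : Nat, kk < groups.length ∧ (kk : Int) ≠ (k : Int) ∧
          t ∈ (groups.getD kk pvGroupD).2.1 := by
      intro t
      rw [hrange0, List.foldl_map]
      exact hsp t
    -- A's update, characterized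
    have hinr : ∀ pr ∈ PySem.List.enumerate SA.1 0, (∀ c ∈ pr.2, PVInR m n c) ∧
        (∀ c ∈ PySem.List.pyGetD SA.2.1 pr.1 PySem.Set.empty, PVInR m n c) := by
      intro pr hpr
      obtain ⟨j, hj, hpr⟩ := (pv_mem_enumerate SA.1 0 pr).mp hpr
      rw [hpr]
      constructor
      · intro c hc
        have hjR : j < R.length := by omega
        have := ((hReg j hjR).2 c).mp (by
          rwa [List.getD_eq_getElem _ _ (by omega : j < SA.1.length),
            ← List.getD_eq_getElem SA.1 default (by omega : j < SA.1.length)] at hc)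
        exact (pv_reach_one (hroot j hjR).1 this).1
      · intro c hc
        have hjR : j < R.length := by omega
        simp only [zero_add, PySem.List.pyGetD_natCast] at hc
        obtain ⟨p, _, hz⟩ := ((hFr j hjR).2 c).mp hc
        exact (mem_pvNbrs.mp hz.1).2
    have hdisj : ∀ pr ∈ PySem.List.enumerate SA.1 0, ∀ pr' ∈ PySem.List.enumerate SA.1 0,
        pr.1 = (k : Int) → pr'.1 ≠ (k : Int) → ∀ c ∈ pr.2,
          c ∉ PySem.List.pyGetD SA.2.1 pr'.1 PySem.Set.empty := by
      intro pr hpr pr' hpr' he hne c hc hc'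
      obtain ⟨j, hj, hprj⟩ := (pv_mem_enumerate SA.1 0 pr).mp hpr
      obtain ⟨j', hj', hprj'⟩ := (pv_mem_enumerate SA.1 0 pr').mp hpr'
      rw [hprj] at he hc
      rw [hprj'] at hc'
      simp only [zero_add] at he hc'
      have hjk : j = k := by exact_mod_cast he
      subst hjk
      have hjR : j < R.length := by omega
      have hj'R : j' < R.length := by omega
      have hone := ((hReg j hjR).2 c).mp (by
        rwa [List.getD_eq_getElem _ _ (by omega : j < SA.1.length),
          ← List.getD_eq_getElem SA.1 default (by omega : j < SA.1.length)] at hc)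
      simp only [PySem.List.pyGetD_natCast] at hc'
      obtain ⟨p, _, hz⟩ := ((hFr j' hj'R).2 c).mp hc'
      have hzero := hz.2
      have hval1 := (pv_reach_one (hroot j hjR).1 hone).2
      rw [hval1] at hzero
      exact absurd hzero (by norm_num)
    obtain ⟨w1, w2⟩ := pvUpdateA_aux m n SA.2.1 (k : Int) SA.1 0 g hs hinr hdisj
    have hupd : pvUpdateA g SA.1 SA.2.1 (k : Int) =
        (PySem.List.enumerate SA.1 0).foldl (fun g ir =>
          if ir.1 == (k : Int) then ir.2.foldl (fun g c => pvGridSet g c (-1)) g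
          else (PySem.List.pyGetD SA.2.1 ir.1 PySem.Set.empty).foldl
            (fun g c => pvGridSet g c 1) g) g := rfl
    rw [← hupd] at w1 w2
    -- memberships translated
    have hQ : ∀ c : Int × Int,
        ((∃ pr ∈ PySem.List.enumerate SA.1 0, pr.1 = (k : Int) ∧ c ∈ pr.2) ↔
          c ∈ SA.1.getD k []) := by
      intro c
      constructor
      · rintro ⟨pr, hpr, he, hmem⟩
        obtain ⟨j, hj, hprj⟩ := (pv_mem_enumerate SA.1 0 pr).mp hpr
        rw [hprj] at he hmem
        simp only [zero_add] at he
        have hjk : j = k := by exact_mod_cast he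
        subst hjk
        simpa using hmem
      · intro hmem
        refine ⟨(0 + (k : Int), SA.1.getD k default),
          (pv_mem_enumerate SA.1 0 _).mpr ⟨k, by omega, rfl⟩, by simp, by simpa using hmem⟩
    have hSmem : ∀ c : Int × Int,
        ((∃ pr ∈ PySem.List.enumerate SA.1 0, pr.1 ≠ (k : Int) ∧
            c ∈ PySem.List.pyGetD SA.2.1 pr.1 PySem.Set.empty) ↔
          (∃ kk : Nat, kk < groups.length ∧ (kk : Int) ≠ (k : Int) ∧
            c ∈ (groups.getD kk pvGroupD).2.1)) := by
      intro c
      constructor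
      · rintro ⟨pr, hpr, hne, hmem⟩
        obtain ⟨j, hj, hprj⟩ := (pv_mem_enumerate SA.1 0 pr).mp hpr
        rw [hprj] at hne hmem
        simp only [zero_add] at hne hmem
        have hjR : j < R.length := by omega
        refine ⟨j, by omega, hne, ?_⟩
        simp only [PySem.List.pyGetD_natCast] at hmem
        exact ((hGg j hjR).2.2.2.1 c).mpr (((hFr j hjR).2 c).mp hmem)
      · rintro ⟨kk, hkk, hne, hmem⟩
        have hkkR : kk < R.length := by omega
        refine ⟨(0 + (kk : Int), SA.1.getD kk default),
          (pv_mem_enumerate SA.1 0 _).mpr ⟨kk, by omega, rfl⟩, by simpa using hne, ?_⟩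
        simp only [zero_add, PySem.List.pyGetD_natCast]
        exact ((hFr kk hkkR).2 c).mpr (((hGg kk hkkR).2.2.2.1 c).mp hmem)
    have hquar : ∀ c : Int × Int,
        (c ∈ PySem.Set.ofList (PySem.List.pyGetD groups (k : Int) pvGroupD).1 ↔
          c ∈ SA.1.getD k []) := by
      intro c
      rw [PySem.Set.mem_ofList]
      simp only [PySem.List.pyGetD_natCast]
      rw [List.getD_eq_getElem _ _ (by omega : k < groups.length),
        List.getD_eq_getElem _ _ (by omega : k < SA.1.length)]
      have h1 := (hG.get (by omega : k < groups.length) hkR).2.1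
      have h2 := (Freg.get (by omega : k < SA.1.length) hkR).2
      exact (h1 c).trans (h2 c).symm
    -- B's rebuilt grid, characterized
    obtain ⟨r1, r2⟩ := pvRebuild_spec g m
      (PySem.Set.ofList (PySem.List.pyGetD groups (k : Int) pvGroupD).1)
      ((PySem.List.pyRange 0 (groups.length : Int) 1).foldl (fun sp kk =>
        if kk ≠ (k : Int) then PySem.Set.update sp (PySem.List.pyGetD groups kk pvGroupD).2.1
        else sp) PySem.Set.empty)
    -- the two grids are equal
    have hlenA : (pvUpdateA g SA.1 SA.2.1 (k : Int)).length = g.length := by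
      have := congrArg List.length w1
      simpa using this
    have hgrids : pvUpdateA g SA.1 SA.2.1 (k : Int) =
        (PySem.List.pyRange 0 m 1).map (fun i =>
          (PySem.List.pyRange 0 ((PySem.List.pyGetD g i []).length : Int) 1).map (fun j =>
            if PySem.Set.contains
              (PySem.Set.ofList (PySem.List.pyGetD groups (k : Int) pvGroupD).1) (i, j)
            then -1
            else if PySem.Set.contains
              ((PySem.List.pyRange 0 (groups.length : Int) 1).foldl (fun sp kk =>
                if kk ≠ (k : Int) then
                  PySem.Set.update sp (PySem.List.pyGetD groups kk pvGroupD).2.1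
                else sp) PySem.Set.empty) (i, j) then 1
            else pvVal g i j)) := by
      refine List.ext_getElem (by rw [hlenA, r1]; have := hs.1; omega) ?_
      intro i hi1 hi2
      have hig : i < g.length := by rw [← hlenA]; exact hi1
      have him : (i : Int) < m := by
        have := hs.1
        omega
      have hrowlenA : (pvUpdateA g SA.1 SA.2.1 (k : Int))[i].length = (g[i]'hig).length := by
        have hmapeq := congrArg (fun l => l[i]?) w1
        simp only [List.getElem?_map] at hmapeq
        rw [List.getElem?_eq_getElem hi1, List.getElem?_eq_getElem hig] at hmapeq
        simpa using hmapeq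
      obtain ⟨hlen2, hval2⟩ := r2 i hi2
      refine List.ext_getElem ?_ ?_
      · rw [hrowlenA, hlen2, List.getD_eq_getElem _ _ hig]
      · intro j hj1 hj2
        have hjg : j < (g[i]'hig).length := by rw [← hrowlenA]; omega
        have hvalA : (pvUpdateA g SA.1 SA.2.1 (k : Int))[i][j] =
            pvVal (pvUpdateA g SA.1 SA.2.1 (k : Int)) (i : Int) (j : Int) := by
          rw [pvVal_eq_getElem (by omega) (by simpa using hi1) (by omega) (by simpa using hj1)]
          simp
        rw [hvalA, hval2 j hj2]
        obtain ⟨q1, q2, q3⟩ := w2 (i : Int) (j : Int) (by omega) him (by omega)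
        by_cases hQm : ((i : Int), (j : Int)) ∈ SA.1.getD k []
        · rw [q1 ((hQ _).mpr hQm),
            if_pos ((PySem.Set.contains_iff _ _).mpr ((hquar _).mpr hQm))]
        · have hqneg : ¬ (PySem.Set.contains
              (PySem.Set.ofList (PySem.List.pyGetD groups (k : Int) pvGroupD).1)
              ((i : Int), (j : Int)) = true) :=
            fun h => hQm ((hquar _).mp ((PySem.Set.contains_iff _ _).mp h))
          by_cases hSm : ∃ kk : Nat, kk < groups.length ∧ (kk : Int) ≠ (k : Int) ∧
              ((i : Int), (j : Int)) ∈ (groups.getD kk pvGroupD).2.1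
          · rw [q2 (fun h => hQm ((hQ _).mp h)) ((hSmem _).mpr hSm), if_neg hqneg,
              if_pos ((PySem.Set.contains_iff _ _).mpr ((hspread _).mpr hSm))]
          · rw [q3 (fun h => hQm ((hQ _).mp h)) (fun h => hSm ((hSmem _).mp h)), if_neg hqneg,
              if_neg (fun h => hSm ((hspread _).mp ((PySem.Set.contains_iff _ _).mp h)))]
    -- the wall counts coincide
    have hw : PySem.List.pyGetD SA.2.2 (k : Int) 0 =
        (PySem.List.pyGetD groups (k : Int) pvGroupD).2.2 := by
      simp only [PySem.List.pyGetD_natCast]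
      rw [List.getD_eq_getElem _ _ (by omega : k < SA.2.2.length),
        List.getD_eq_getElem _ _ (by omega : k < groups.length)]
      obtain ⟨lst, hl1, hl2, hl3⟩ := Fw.get (by omega : k < SA.2.2.length) hkR
      obtain ⟨hg1, hg2, _, _, hg5⟩ := hG.get (by omega : k < groups.length) hkR
      simp only [List.get_eq_getElem] at hl3 hg5
      rw [hl3, hg5]
      exact pv_sum_map_eq (pvZC g m n) hl1 hg1 (fun x => (hl2 x).trans ((hg2 x).symm))
    constructor
    · rw [hA, hB, hgrids, hw]
    · intro g' w h
      rw [hA] at h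
      have hpair := Option.some.inj h
      have hg' : pvUpdateA g SA.1 SA.2.1 (k : Int) = g' := congrArg Prod.fst hpair
      rw [← hg']
      exact pvGShape_of_rowlens w1 hs

-- the fueled outer loops agree day by day
theorem pvLoop_eq (m n : Int) (hm : 0 ≤ m) (hn : 0 ≤ n) :
    ∀ (fuel : Nat) (g : List (List Int)) (total : Int), PVGShape g m n →
      pvLoopA m n fuel g total = pvLoopB m n fuel g total := by
  intro fuel
  induction fuel with
  | zero => intro g total _; rfl
  | succ fuel ih =>
    intro g total hs
    obtain ⟨hd, hshape⟩ := pvDay_eq g m n hm hn hs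
    rw [pvLoopA, pvLoopB, ← hd]
    cases h : pvDayA g m n with
    | none => rfl
    | some r => exact ih r.1 (total + r.2) (hshape r.1 r.2 h)

-- ===== VERDICT (by name: the statement is the Claim_ definition above) =====
theorem containVirus_spec : Claim_equal_containVirus := by
  intro isInfected _ hpre
  obtain ⟨hne, hrows⟩ := hpre
  unfold Spec_containVirus containVirus containVirus_alt
  have hshape : PVGShape isInfected (isInfected.length : Int)
      ((PySem.List.pyGetD isInfected 0 []).length : Int) := by
    refine ⟨rfl, ?_⟩
    intro row hrow
    rw [pv_getD_zero_headD]
    exact_mod_cast hrows row hrow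
  exact pvLoop_eq (isInfected.length : Int) ((PySem.List.pyGetD isInfected 0 []).length : Int)
    (by positivity) (by positivity) _ isInfected 0 hshape
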